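-- pv_equiv track=rewrite | github.com/fiddlydiddle/advent_of_code | 2017/day21/python.py | part1
-- ===== SOURCE A (Python) =====
-- def part1(starting_shape, pattern_rules, num_iterations):
--     result_shape = starting_shape
--     for i in range(num_iterations):
--         size = len(result_shape)
--
--         # Split even-number size grid into many 2x2 grids
--         if size % 2 == 0:
--             items_per_row = size // 2
--             num_pieces = items_per_row ** 2
--             new_shape = [''] * (items_per_row * 3)
--             for j in range(num_pieces):
--                 # Find piece in current shape
--                 start_row = 2 * (j // items_per_row)
--                 start_col = (2 * j) % size
--                 piece = [
--                     result_shape[start_row][start_col:start_col+2],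
--                     result_shape[start_row + 1][start_col:start_col+2]
--                 ]
--
--                 # Flip and rotate piece until it matches a rule
--                 new_piece = apply_rule(piece, pattern_rules)
--
--                 # Apply rule and update new shape
--                 new_piece = to_pattern_array(new_piece)
--                 new_shape[(3 * (j // items_per_row)) + 0] += new_piece[0]
--                 new_shape[(3 * (j // items_per_row)) + 1] += new_piece[1]
--                 new_shape[(3 * (j // items_per_row)) + 2] += new_piece[2]
--
--             result_shape = new_shape
--         # split non-even-number size grid into 3x3 grids
--         else:
--             items_per_row = size // 3
--             num_pieces = items_per_row ** 2
--             new_shape = [''] * (items_per_row * 4)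
--             for j in range(num_pieces):
--                 # Find piece in current shape
--                 start_row = 3 * (j // items_per_row)
--                 start_col = (3 * j) % size
--                 piece = [
--                     result_shape[start_row][start_col:start_col+3],
--                     result_shape[start_row + 1][start_col:start_col+3],
--                     result_shape[start_row + 2][start_col:start_col+3]
--                 ]
--
--                 # Flip and rotate piece until it matches a rule
--                 new_piece = apply_rule(piece, pattern_rules)
--
--                 # Apply rule and update new shape
--                 new_piece = to_pattern_array(new_piece)
--                 new_shape[(4 * (j // items_per_row)) + 0] += new_piece[0]
--                 new_shape[(4 * (j // items_per_row)) + 1] += new_piece[1]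
--                 new_shape[(4 * (j // items_per_row)) + 2] += new_piece[2]
--                 new_shape[(4 * (j // items_per_row)) + 3] += new_piece[3]
--
--             result_shape = new_shape
--
--     return result_shape
--
-- def apply_rule(piece, pattern_rules):
--     new_piece = None
--     num_rotations = 0
--     while not new_piece and num_rotations < 4:
--         if to_pattern_string(piece) in pattern_rules:
--             new_piece = pattern_rules[to_pattern_string(piece)]
--         else:
--             piece = rotate_piece(piece)
--             if to_pattern_string(piece) in pattern_rules:
--                 new_piece = pattern_rules[to_pattern_string(piece)]
--             else:
--                 flipped_piece = flip_piece(piece)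
--                 if to_pattern_string(flipped_piece) in pattern_rules:
--                     new_piece = pattern_rules[to_pattern_string(flipped_piece)]
--
--         num_rotations += 1
--
--     return new_piece
--
-- def rotate_piece(piece):
--     return [''.join(column) for column in zip(*piece)][::-1]
--
-- def flip_piece(piece):
--     return [row[::-1] for row in piece]
--
-- def to_pattern_string(piece):
--     return "/".join(piece)
--
-- def to_pattern_array(piece):
--     return piece.split('/')
-- ===== SOURCE B (Python) =====
-- # B: instead of rotating/flipping each piece until a rule matches, build one lookup
-- # table mapping every orientation (rotations and flips) of each rule's pattern to its
-- # output, so each piece is resolved by a single dict lookup; one unified loop handles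
-- # both block sizes.
-- def part1(starting_shape, pattern_rules, num_iterations):
--     table = {}
--     for key, out in pattern_rules.items():
--         p = key.split('/')
--         for _ in range(4):
--             table['/'.join(p)] = out
--             table['/'.join(row[::-1] for row in p)] = out
--             p = [''.join(col) for col in zip(*p)][::-1]
--
--     grid = starting_shape
--     for _ in range(num_iterations):
--         n = len(grid)
--         bs = 2 if n % 2 == 0 else 3
--         blocks = n // bs
--         out = [''] * (blocks * (bs + 1))
--         for j in range(blocks * blocks):
--             q = j // blocks
--             c = (bs * j) % n
--             piece = '/'.join(grid[q * bs + k][c:c + bs] for k in range(bs))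
--             rows = table[piece].split('/')
--             for k in range(bs + 1):
--                 out[(bs + 1) * q + k] += rows[k]
--         grid = out
--     return grid
-- ===== Notes on version B (the rewrite author's own statement) =====
-- stated objective: faster
-- what changed: B builds one dict mapping every rotation/flip orientation of each rule pattern to its output and resolves each piece with a single lookup, replacing A's per-piece rotate/flip search; Pre_ restricts to the natural domain (square '/'-free grid of block-divisible size, orientation-consistent rules sized 2x2->3x3/3x3->4x4 and covering every block over the alphabet) because outside it A either raises or its value depends on search order / lossy rotation of ragged pieces.
import Mathlib
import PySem

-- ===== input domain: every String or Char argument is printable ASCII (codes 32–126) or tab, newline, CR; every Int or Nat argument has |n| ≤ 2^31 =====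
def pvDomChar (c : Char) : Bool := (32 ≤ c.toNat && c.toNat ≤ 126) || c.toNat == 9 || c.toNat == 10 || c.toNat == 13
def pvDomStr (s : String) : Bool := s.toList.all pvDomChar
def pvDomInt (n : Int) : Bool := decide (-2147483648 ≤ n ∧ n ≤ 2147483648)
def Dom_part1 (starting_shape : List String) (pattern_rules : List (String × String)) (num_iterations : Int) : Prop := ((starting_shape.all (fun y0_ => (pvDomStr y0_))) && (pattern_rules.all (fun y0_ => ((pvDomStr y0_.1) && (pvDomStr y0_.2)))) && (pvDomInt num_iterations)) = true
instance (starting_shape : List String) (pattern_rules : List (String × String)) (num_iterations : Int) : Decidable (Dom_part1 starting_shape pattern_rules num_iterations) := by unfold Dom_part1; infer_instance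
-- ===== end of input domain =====

-- B builds one table of every rule-pattern orientation and resolves each piece with a
-- single lookup, instead of A's per-piece rotate/flip search; A = B proved on Pre_part1.

-- ===== PORT A =====
-- zip(*rows): tuples of the i-th elements of every row, truncated to the shortest row
def pvZipStar (rows : List (List Char)) : List (List Char) :=
  (List.range (((rows.map List.length).min?).getD 0)).map
    (fun i => rows.map (fun r => r.getD i ' '))

-- rotate_piece: [''.join(column) for column in zip(*piece)][::-1]   ([::-1] = reverse)
def rotatePiece (piece : List String) : List String :=
  ((pvZipStar (piece.map String.toList)).map String.ofList).reverse

-- flip_piece: [row[::-1] for row in piece]   (row[::-1] = reversed string)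
def flipPiece (piece : List String) : List String :=
  piece.map (fun r => String.ofList r.toList.reverse)

-- to_pattern_string: "/".join(piece)
def toPatternString (piece : List String) : String := PySem.Str.join "/" piece

-- to_pattern_array: piece.split('/')   (separator "/" ≠ "" so split? is never none)
def toPatternArray (s : String) : List String := (PySem.Str.split? s "/").getD []

-- Python truthiness of the Optional[str] new_piece: None and "" are falsy
def pvTruthyStr : Option String → Bool
  | none => false
  | some s => !(s == "")

-- apply_rule's while loop: 'while not new_piece and num_rotations < 4'
def applyRuleGo (d : PySem.Dict String String) : Nat → List String → Option String → Option String
  | 0, _, np => np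
  | fuel+1, piece, np =>
    if pvTruthyStr np then np
    else
      match d.get? (toPatternString piece) with
      | some v => applyRuleGo d fuel piece (some v)
      | none =>
        let p1 := rotatePiece piece
        match d.get? (toPatternString p1) with
        | some v => applyRuleGo d fuel p1 (some v)
        | none => applyRuleGo d fuel p1 ((d.get? (toPatternString (flipPiece p1))).elim np some)

def applyRule (piece : List String) (d : PySem.Dict String String) : Option String :=
  applyRuleGo d 4 piece none

-- the body of A's 'for i in range(num_iterations)' loop (indices are provably in range
-- under Pre_part1, where Python raises no IndexError; apply_rule returning None is
-- Python's AttributeError at .split, excluded by Pre_part1)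
def part1Step (d : PySem.Dict String String) (g : List String) : List String :=
  let size : Int := g.length
  if PySem.Int.mod size 2 == 0 then
    let ipr := PySem.Int.floordiv size 2
    (PySem.List.pyRange 0 (ipr ^ 2) 1).foldl (fun ns j =>
      let startRow := 2 * PySem.Int.floordiv j ipr
      let startCol := PySem.Int.mod (2 * j) size
      let piece := [PySem.Str.slice (PySem.List.pyGetD g startRow "") (some startCol) (some (startCol + 2)),
                    PySem.Str.slice (PySem.List.pyGetD g (startRow + 1) "") (some startCol) (some (startCol + 2))]
      let newPiece := toPatternArray ((applyRule piece d).getD "")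
      let b := 3 * PySem.Int.floordiv j ipr
      let ns := PySem.List.pySetD ns (b + 0) (PySem.List.pyGetD ns (b + 0) "" ++ PySem.List.pyGetD newPiece 0 "")
      let ns := PySem.List.pySetD ns (b + 1) (PySem.List.pyGetD ns (b + 1) "" ++ PySem.List.pyGetD newPiece 1 "")
      PySem.List.pySetD ns (b + 2) (PySem.List.pyGetD ns (b + 2) "" ++ PySem.List.pyGetD newPiece 2 ""))
      (List.replicate (ipr * 3).toNat "")
  else
    let ipr := PySem.Int.floordiv size 3
    (PySem.List.pyRange 0 (ipr ^ 2) 1).foldl (fun ns j =>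
      let startRow := 3 * PySem.Int.floordiv j ipr
      let startCol := PySem.Int.mod (3 * j) size
      let piece := [PySem.Str.slice (PySem.List.pyGetD g startRow "") (some startCol) (some (startCol + 3)),
                    PySem.Str.slice (PySem.List.pyGetD g (startRow + 1) "") (some startCol) (some (startCol + 3)),
                    PySem.Str.slice (PySem.List.pyGetD g (startRow + 2) "") (some startCol) (some (startCol + 3))]
      let newPiece := toPatternArray ((applyRule piece d).getD "")
      let b := 4 * PySem.Int.floordiv j ipr
      let ns := PySem.List.pySetD ns (b + 0) (PySem.List.pyGetD ns (b + 0) "" ++ PySem.List.pyGetD newPiece 0 "")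
      let ns := PySem.List.pySetD ns (b + 1) (PySem.List.pyGetD ns (b + 1) "" ++ PySem.List.pyGetD newPiece 1 "")
      let ns := PySem.List.pySetD ns (b + 2) (PySem.List.pyGetD ns (b + 2) "" ++ PySem.List.pyGetD newPiece 2 "")
      PySem.List.pySetD ns (b + 3) (PySem.List.pyGetD ns (b + 3) "" ++ PySem.List.pyGetD newPiece 3 ""))
      (List.replicate (ipr * 4).toNat "")

def part1 (starting_shape : List String) (pattern_rules : List (String × String)) (num_iterations : Int) : List String :=
  let d := PySem.Dict.ofList pattern_rules   -- the dict the Python function receives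
  (PySem.List.pyRange 0 num_iterations 1).foldl (fun g _ => part1Step d g) starting_shape

-- ===== PORT B =====
-- key.split('/')
def pvSplitRows (s : String) : List String := (PySem.Str.split? s "/").getD []

-- '/'.join(p)
def pvJoinRows (p : List String) : String := PySem.Str.join "/" p

-- [row[::-1] for row in p]
def pvFlipRows (p : List String) : List String :=
  p.map (fun r => String.ofList r.toList.reverse)

-- zip(*p) on char rows
def pvZipCols (rows : List (List Char)) : List (List Char) :=
  (List.range (((rows.map List.length).min?).getD 0)).map
    (fun i => rows.map (fun r => r.getD i ' '))

-- [''.join(col) for col in zip(*p)][::-1]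
def pvRotRows (p : List String) : List String :=
  ((pvZipCols (p.map String.toList)).map String.ofList).reverse

-- Source B's table-building loop: for each rule, insert all orientations of its pattern
def pvBuildTable (rules : List (String × String)) : PySem.Dict String String :=
  (PySem.Dict.ofList rules).items.foldl (fun t kv =>
    ((PySem.List.pyRange 0 4 1).foldl
      (fun tp _ =>
        (((tp.1.insert (pvJoinRows tp.2) kv.2).insert (pvJoinRows (pvFlipRows tp.2)) kv.2),
         pvRotRows tp.2))
      (t, pvSplitRows kv.1)).1)
    PySem.Dict.empty

-- the body of Source B's expansion loop ('table[piece]' raising KeyError is outside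
-- Pre_part1; indices in range under Pre_part1)
def part1AltStep (table : PySem.Dict String String) (g : List String) : List String :=
  let n : Int := g.length
  let bs : Int := if PySem.Int.mod n 2 == 0 then 2 else 3
  let blocks := PySem.Int.floordiv n bs
  (PySem.List.pyRange 0 (blocks * blocks) 1).foldl (fun out j =>
    let q := PySem.Int.floordiv j blocks
    let c := PySem.Int.mod (bs * j) n
    let pieceStr := PySem.Str.join "/" ((PySem.List.pyRange 0 bs 1).map (fun k =>
        PySem.Str.slice (PySem.List.pyGetD g (q * bs + k) "") (some c) (some (c + bs))))
    let rows := (PySem.Str.split? ((table.get? pieceStr).getD "") "/").getD []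
    (PySem.List.pyRange 0 (bs + 1) 1).foldl (fun out k =>
      PySem.List.pySetD out ((bs + 1) * q + k)
        (PySem.List.pyGetD out ((bs + 1) * q + k) "" ++ PySem.List.pyGetD rows k "")) out)
    (List.replicate (blocks * (bs + 1)).toNat "")

def part1_alt (starting_shape : List String) (pattern_rules : List (String × String)) (num_iterations : Int) : List String :=
  let table := pvBuildTable pattern_rules
  (PySem.List.pyRange 0 num_iterations 1).foldl (fun g _ => part1AltStep table g) starting_shape

-- ===== PRECONDITION & SPEC =====
-- Pre_-side copies of the orientation helpers (kept separate from the ports)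
def pvSplitRowsP (s : String) : List String := (PySem.Str.split? s "/").getD []
def pvJoinRowsP (p : List String) : String := PySem.Str.join "/" p
def pvFlipRowsP (p : List String) : List String :=
  p.map (fun r => String.ofList r.toList.reverse)
def pvZipColsP (rows : List (List Char)) : List (List Char) :=
  (List.range (((rows.map List.length).min?).getD 0)).map
    (fun i => rows.map (fun r => r.getD i ' '))
def pvRotRowsP (p : List String) : List String :=
  ((pvZipColsP (p.map String.toList)).map String.ofList).reverse

-- the eight pattern strings the orientation loop of one rule key produces
def pvKeyOrbitP (k : String) : List String :=
  let p0 := pvSplitRowsP k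
  let p1 := pvRotRowsP p0
  let p2 := pvRotRowsP p1
  let p3 := pvRotRowsP p2
  [pvJoinRowsP p0, pvJoinRowsP (pvFlipRowsP p0),
   pvJoinRowsP p1, pvJoinRowsP (pvFlipRowsP p1),
   pvJoinRowsP p2, pvJoinRowsP (pvFlipRowsP p2),
   pvJoinRowsP p3, pvJoinRowsP (pvFlipRowsP p3)]

-- the eight orientations of a 2x2 pattern "ab/xy", in A's probe order
def pvOrbit2 (a b x y : Char) : List String :=
  [String.ofList [a,b,'/',x,y], String.ofList [b,y,'/',a,x],
   String.ofList [y,b,'/',x,a], String.ofList [y,x,'/',b,a],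
   String.ofList [x,y,'/',a,b], String.ofList [x,a,'/',y,b],
   String.ofList [a,x,'/',b,y], String.ofList [b,a,'/',y,x]]

-- the eight orientations of a 3x3 pattern "abc/def/ghi", in A's probe order
def pvOrbit3 (a b c d e f g h i : Char) : List String :=
  [String.ofList [a,b,c,'/',d,e,f,'/',g,h,i], String.ofList [c,f,i,'/',b,e,h,'/',a,d,g],
   String.ofList [i,f,c,'/',h,e,b,'/',g,d,a], String.ofList [i,h,g,'/',f,e,d,'/',c,b,a],
   String.ofList [g,h,i,'/',d,e,f,'/',a,b,c], String.ofList [g,d,a,'/',h,e,b,'/',i,f,c],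
   String.ofList [a,d,g,'/',b,e,h,'/',c,f,i], String.ofList [c,b,a,'/',f,e,d,'/',i,h,g]]

-- a chunk of width w over the alphabet C
def pvChunkOK (C : List Char) (w : Nat) (p : List Char) : Bool :=
  p.length == w && p.all (C.contains ·)

-- a rule value of shape m rows × m columns (as Python sees it: m-1 slashes, chunks of width m)
def pvValOK (C : List Char) (m : Nat) (v : String) : Bool :=
  let ps := PySem.Chars.splitOn v.toList ['/']
  ps.length == m && ps.all (pvChunkOK C m)

-- a key of the 2x2 (resp. 3x3) pattern shape
def pvShape2 (s : String) : Bool :=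
  match s.toList with
  | [u, v, s1, w, z] => s1 == '/' && u != '/' && v != '/' && w != '/' && z != '/'
  | _ => false

def pvShape3 (s : String) : Bool :=
  match s.toList with
  | [a, b, c, s1, d, e, f, s2, g, h, i] =>
      s1 == '/' && s2 == '/' && a != '/' && b != '/' && c != '/' && d != '/' && e != '/' &&
        f != '/' && g != '/' && h != '/' && i != '/'
  | _ => false

-- every 2x2 key maps to a 3x3 value over C, every 3x3 key to a 4x4 value over C
def pvRulesOK (d : PySem.Dict String String) (C : List Char) : Bool :=
  d.items.all (fun kv =>
    (!pvShape2 kv.1 || pvValOK C 3 kv.2) && (!pvShape3 kv.1 || pvValOK C 4 kv.2))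

-- no two rules whose orientation images overlap disagree on the output
def pvConflictFree (d : PySem.Dict String String) : Bool :=
  d.items.all (fun kv1 => d.items.all (fun kv2 =>
    (pvKeyOrbitP kv1.1).all (fun s => !(pvKeyOrbitP kv2.1).contains s) || kv1.2 == kv2.2))

-- every 2x2 (resp. 3x3) pattern over C matches a rule in some orientation
def pvComplete2 (d : PySem.Dict String String) (C : List Char) : Bool :=
  C.all fun a => C.all fun b => C.all fun x => C.all fun y =>
    (pvOrbit2 a b x y).any (fun s => (d.get? s).isSome)

def pvComplete3 (d : PySem.Dict String String) (C : List Char) : Bool :=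
  C.all fun a => C.all fun b => C.all fun c => C.all fun x => C.all fun y =>
    C.all fun z => C.all fun u => C.all fun v' => C.all fun w =>
    (pvOrbit3 a b c x y z u v' w).any (fun s => (d.get? s).isSome)

-- the alphabet: every character of the grid, plus every character of any rule value
-- except the row separator '/'
def pvAlphabet (starting_shape : List String) (pattern_rules : List (String × String)) : List Char :=
  PySem.List.dedup (starting_shape.flatMap String.toList ++ pattern_rules.flatMap (fun p => p.2.toList.filter (· ≠ '/')))

def pvSquare (g : List String) : Bool := g.all (fun r => r.toList.length == g.length)
def pvNoSlash (g : List String) : Bool := g.all (fun r => !(r.toList.contains '/'))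

-- Pre_part1 restricts to the task's natural domain: a square '/'-free grid whose size is
-- divisible by the block size, and rules of the 2x2->3x3 / 3x3->4x4 form that cover every
-- block over the alphabet and never give two orientation-overlapping patterns different
-- outputs; outside it A raises (unmatched piece), or its value depends on the rotate/flip
-- search order (conflicting rules) or on lossy rotation of ragged/partial pieces.
def Pre_part1 (starting_shape : List String) (pattern_rules : List (String × String)) (num_iterations : Int) : Prop :=
  num_iterations ≤ 0 ∨ starting_shape.length ≤ 1 ∨
    (pvSquare starting_shape = true ∧ pvNoSlash starting_shape = true ∧
     (starting_shape.length % 2 = 0 ∨ starting_shape.length % 3 = 0) ∧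
     pvRulesOK (PySem.Dict.ofList pattern_rules) (pvAlphabet starting_shape pattern_rules) = true ∧
     pvConflictFree (PySem.Dict.ofList pattern_rules) = true ∧
     pvComplete2 (PySem.Dict.ofList pattern_rules) (pvAlphabet starting_shape pattern_rules) = true ∧
     pvComplete3 (PySem.Dict.ofList pattern_rules) (pvAlphabet starting_shape pattern_rules) = true)

instance (starting_shape : List String) (pattern_rules : List (String × String)) (num_iterations : Int) : Decidable (Pre_part1 starting_shape pattern_rules num_iterations) := by
  unfold Pre_part1; infer_instance

def pvWitness_part1 : List String × (List (String × String)) × Int :=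
  (["##", "##"],
   [("##/##", "###/###/###"), ("###/###/###", "####/####/####/####")],
   2)

def Spec_part1 (starting_shape : List String) (pattern_rules : List (String × String)) (num_iterations : Int) (out : List String) : Prop := out = part1_alt starting_shape pattern_rules num_iterations
instance (starting_shape : List String) (pattern_rules : List (String × String)) (num_iterations : Int) (out : List String) : Decidable (Spec_part1 starting_shape pattern_rules num_iterations out) := by unfold Spec_part1; infer_instance

-- ===== CLAIM (what is proved, stated in full; the proofs are below) =====
def Claim_equal_part1 : Prop := ∀ (starting_shape : List String) (pattern_rules : List (String × String)) (num_iterations : Int), Dom_part1 starting_shape pattern_rules num_iterations → Pre_part1 starting_shape pattern_rules num_iterations → Spec_part1 starting_shape pattern_rules num_iterations (part1 starting_shape pattern_rules num_iterations)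

-- ===== LEMMAS AND PROOFS =====

-- toPatternArray / pvSplitRows / pvSplitRowsP via Chars.splitOn
theorem pv_toPatternArray_eq (v : String) :
    toPatternArray v = (PySem.Chars.splitOn v.toList ['/']).map String.ofList := by
  have h := PySem.Str.split?_map v "/"
  simp only [PySem.Chars.split?, show ("/" : String).toList = ['/'] from rfl,
    show (['/'] : List Char).isEmpty = false from rfl, Bool.false_eq_true, if_false] at h
  cases hs : PySem.Str.split? v "/" with
  | none => rw [hs] at h; simp at h
  | some l =>
    rw [hs] at h
    simp only [Option.map_some, Option.some.injEq] at h
    simp only [toPatternArray, hs, Option.getD_some]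
    rw [← h, List.map_map]
    simp [Function.comp_def]

theorem pv_splitRowsP_eq_toPatternArray : pvSplitRowsP = toPatternArray := rfl
theorem pv_splitRows_eq_toPatternArray : pvSplitRows = toPatternArray := rfl
theorem pv_rotRows_eq : pvRotRows = rotatePiece := rfl
theorem pv_rotRowsP_eq : pvRotRowsP = rotatePiece := rfl
theorem pv_flipRows_eq : pvFlipRows = flipPiece := rfl
theorem pv_flipRowsP_eq : pvFlipRowsP = flipPiece := rfl
theorem pv_joinRows_eq : pvJoinRows = toPatternString := rfl
theorem pv_joinRowsP_eq : pvJoinRowsP = toPatternString := rfl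

-- splitOn of the two shaped pattern forms
theorem pv_splitOn2 (u v w z : Char) (hu : u ≠ '/') (hv : v ≠ '/') (hw : w ≠ '/') (hz : z ≠ '/') :
    PySem.Chars.splitOn [u, v, '/', w, z] ['/'] = [[u, v], [w, z]] := by
  simp [PySem.Chars.splitOn, PySem.Chars.splitOn.go, List.isPrefixOf,
    Ne.symm hu, Ne.symm hv, Ne.symm hw, Ne.symm hz]

theorem pv_splitOn3 (a b c d e f g h i : Char) (ha : a ≠ '/') (hb : b ≠ '/') (hc : c ≠ '/')
    (hd : d ≠ '/') (he : e ≠ '/') (hf : f ≠ '/') (hg : g ≠ '/') (hh : h ≠ '/') (hi : i ≠ '/') :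
    PySem.Chars.splitOn [a, b, c, '/', d, e, f, '/', g, h, i] ['/'] = [[a,b,c], [d,e,f], [g,h,i]] := by
  simp [PySem.Chars.splitOn, PySem.Chars.splitOn.go, List.isPrefixOf,
    Ne.symm ha, Ne.symm hb, Ne.symm hc, Ne.symm hd, Ne.symm he, Ne.symm hf,
    Ne.symm hg, Ne.symm hh, Ne.symm hi]

-- joins of explicit rows
theorem pv_join_two (s0 s1 : String) :
    (toPatternString [s0, s1]).toList = s0.toList ++ '/' :: s1.toList := by
  simp [toPatternString, PySem.Str.toList_join, PySem.Chars.join_cons_cons,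
    PySem.Chars.join_singleton]

theorem pv_join_three (s0 s1 s2 : String) :
    (toPatternString [s0, s1, s2]).toList = s0.toList ++ '/' :: s1.toList ++ '/' :: s2.toList := by
  simp [toPatternString, PySem.Str.toList_join, PySem.Chars.join_cons_cons,
    PySem.Chars.join_singleton]

theorem pv_join2_ofList (u v w z : Char) :
    toPatternString [String.ofList [u,v], String.ofList [w,z]] = String.ofList [u,v,'/',w,z] := by
  rw [← String.ofList_toList (s := toPatternString _), pv_join_two]
  simp [String.toList_ofList]

theorem pv_join3_ofList (a b c d e f g h i : Char) :
    toPatternString [String.ofList [a,b,c], String.ofList [d,e,f], String.ofList [g,h,i]]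
      = String.ofList [a,b,c,'/',d,e,f,'/',g,h,i] := by
  rw [← String.ofList_toList (s := toPatternString _), pv_join_three]
  simp [String.toList_ofList]

-- rotate / flip on explicit 2-row and 3-row pieces
theorem pv_rot2 (a b x y : Char) :
    rotatePiece [String.ofList [a,b], String.ofList [x,y]]
      = [String.ofList [b,y], String.ofList [a,x]] := by
  simp [rotatePiece, pvZipStar, String.toList_ofList, List.range_succ]

theorem pv_rot3 (a b c d e f g h i : Char) :
    rotatePiece [String.ofList [a,b,c], String.ofList [d,e,f], String.ofList [g,h,i]]
      = [String.ofList [c,f,i], String.ofList [b,e,h], String.ofList [a,d,g]] := by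
  simp [rotatePiece, pvZipStar, String.toList_ofList, List.range_succ]

theorem pv_flip2 (a b : Char) (x y : Char) :
    flipPiece [String.ofList [a,b], String.ofList [x,y]]
      = [String.ofList [b,a], String.ofList [y,x]] := by
  simp [flipPiece, String.toList_ofList]

theorem pv_flip3 (a b c d e f g h i : Char) :
    flipPiece [String.ofList [a,b,c], String.ofList [d,e,f], String.ofList [g,h,i]]
      = [String.ofList [c,b,a], String.ofList [f,e,d], String.ofList [i,h,g]] := by
  simp [flipPiece, String.toList_ofList]

-- the orientation images of a shaped 2x2 / 3x3 key
theorem pv_keyOrbit2 (u v w z : Char) (hu : u ≠ '/') (hv : v ≠ '/') (hw : w ≠ '/') (hz : z ≠ '/') :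
    pvKeyOrbitP (String.ofList [u,v,'/',w,z]) =
      [String.ofList [u,v,'/',w,z], String.ofList [v,u,'/',z,w],
       String.ofList [v,z,'/',u,w], String.ofList [z,v,'/',w,u],
       String.ofList [z,w,'/',v,u], String.ofList [w,z,'/',u,v],
       String.ofList [w,u,'/',z,v], String.ofList [u,w,'/',v,z]] := by
  have hs : pvSplitRowsP (String.ofList [u,v,'/',w,z]) = [String.ofList [u,v], String.ofList [w,z]] := by
    rw [pv_splitRowsP_eq_toPatternArray, pv_toPatternArray_eq, String.toList_ofList,
      pv_splitOn2 u v w z hu hv hw hz]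
    rfl
  rw [pvKeyOrbitP, hs]
  rw [pv_rotRowsP_eq, pv_flipRowsP_eq, pv_joinRowsP_eq]
  rw [pv_rot2 u v w z]
  rw [pv_rot2 v z u w]
  rw [pv_rot2 z w v u]
  simp only [pv_flip2, pv_join2_ofList]

theorem pv_keyOrbit3 (a b c d e f g h i : Char) (ha : a ≠ '/') (hb : b ≠ '/') (hc : c ≠ '/')
    (hd : d ≠ '/') (he : e ≠ '/') (hf : f ≠ '/') (hg : g ≠ '/') (hh : h ≠ '/') (hi : i ≠ '/') :
    pvKeyOrbitP (String.ofList [a,b,c,'/',d,e,f,'/',g,h,i]) =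
      [String.ofList [a,b,c,'/',d,e,f,'/',g,h,i], String.ofList [c,b,a,'/',f,e,d,'/',i,h,g],
       String.ofList [c,f,i,'/',b,e,h,'/',a,d,g], String.ofList [i,f,c,'/',h,e,b,'/',g,d,a],
       String.ofList [i,h,g,'/',f,e,d,'/',c,b,a], String.ofList [g,h,i,'/',d,e,f,'/',a,b,c],
       String.ofList [g,d,a,'/',h,e,b,'/',i,f,c], String.ofList [a,d,g,'/',b,e,h,'/',c,f,i]] := by
  have hs : pvSplitRowsP (String.ofList [a,b,c,'/',d,e,f,'/',g,h,i])
      = [String.ofList [a,b,c], String.ofList [d,e,f], String.ofList [g,h,i]] := by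
    rw [pv_splitRowsP_eq_toPatternArray, pv_toPatternArray_eq, String.toList_ofList,
      pv_splitOn3 a b c d e f g h i ha hb hc hd he hf hg hh hi]
    rfl
  rw [pvKeyOrbitP, hs]
  rw [pv_rotRowsP_eq, pv_flipRowsP_eq, pv_joinRowsP_eq]
  rw [pv_rot3 a b c d e f g h i]
  rw [pv_rot3 c f i b e h a d g]
  rw [pv_rot3 i h g f e d c b a]
  simp only [pv_flip3, pv_join3_ofList]


-- orientation symmetry: the base pattern lies in the orbit of each of its orientations
theorem pv_orbit2_sym (a b x y : Char) (ha : a ≠ '/') (hb : b ≠ '/') (hx : x ≠ '/') (hy : y ≠ '/') :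
    ∀ k ∈ pvOrbit2 a b x y, String.ofList [a,b,'/',x,y] ∈ pvKeyOrbitP k := by
  intro k hk
  simp only [pvOrbit2, List.mem_cons, List.not_mem_nil, or_false] at hk
  rcases hk with rfl | rfl | rfl | rfl | rfl | rfl | rfl | rfl <;>
    (first
      | (rw [pv_keyOrbit2 _ _ _ _ ha hb hx hy]; simp)
      | (rw [pv_keyOrbit2 _ _ _ _ hb hy ha hx]; simp)
      | (rw [pv_keyOrbit2 _ _ _ _ hy hb hx ha]; simp)
      | (rw [pv_keyOrbit2 _ _ _ _ hy hx hb ha]; simp)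
      | (rw [pv_keyOrbit2 _ _ _ _ hx hy ha hb]; simp)
      | (rw [pv_keyOrbit2 _ _ _ _ hx ha hy hb]; simp)
      | (rw [pv_keyOrbit2 _ _ _ _ ha hx hb hy]; simp)
      | (rw [pv_keyOrbit2 _ _ _ _ hb ha hy hx]; simp))

theorem pv_orbit3_sym (a b c d e f g h i : Char) (ha : a ≠ '/') (hb : b ≠ '/') (hc : c ≠ '/')
    (hd : d ≠ '/') (he : e ≠ '/') (hf : f ≠ '/') (hg : g ≠ '/') (hh : h ≠ '/') (hi : i ≠ '/') :
    ∀ k ∈ pvOrbit3 a b c d e f g h i,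
      String.ofList [a,b,c,'/',d,e,f,'/',g,h,i] ∈ pvKeyOrbitP k := by
  intro k hk
  simp only [pvOrbit3, List.mem_cons, List.not_mem_nil, or_false] at hk
  rcases hk with rfl | rfl | rfl | rfl | rfl | rfl | rfl | rfl <;>
    (first
      | (rw [pv_keyOrbit3 _ _ _ _ _ _ _ _ _ ha hb hc hd he hf hg hh hi]; simp)
      | (rw [pv_keyOrbit3 _ _ _ _ _ _ _ _ _ hc hf hi hb he hh ha hd hg]; simp)
      | (rw [pv_keyOrbit3 _ _ _ _ _ _ _ _ _ hi hf hc hh he hb hg hd ha]; simp)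
      | (rw [pv_keyOrbit3 _ _ _ _ _ _ _ _ _ hi hh hg hf he hd hc hb ha]; simp)
      | (rw [pv_keyOrbit3 _ _ _ _ _ _ _ _ _ hg hh hi hd he hf ha hb hc]; simp)
      | (rw [pv_keyOrbit3 _ _ _ _ _ _ _ _ _ hg hd ha hh he hb hi hf hc]; simp)
      | (rw [pv_keyOrbit3 _ _ _ _ _ _ _ _ _ ha hd hg hb he hh hc hf hi]; simp)
      | (rw [pv_keyOrbit3 _ _ _ _ _ _ _ _ _ hc hb ha hf he hd hi hh hg]; simp))

-- a fold of inserts whose keys all differ from k does not change the lookup at k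
theorem pv_foldl_insert_skip (l : List (String × String)) (t : PySem.Dict String String)
    (k : String) (h : ∀ p ∈ l, p.1 ≠ k) :
    (l.foldl (fun t p => t.insert p.1 p.2) t).get? k = t.get? k := by
  induction l generalizing t with
  | nil => rfl
  | cons a l ih =>
    simp only [List.foldl_cons]
    rw [ih _ (fun p hp => h p (List.mem_cons_of_mem a hp))]
    exact PySem.Dict.get?_insert_of_ne t a.2 (Ne.symm (h a (List.mem_cons_self)))

-- if some pair in l has key k and every pair with key k carries value v, lookup gives v
theorem pv_foldl_insert_last (l : List (String × String)) :
    ∀ (t : PySem.Dict String String) (k : String) (v : String),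
      (∃ p ∈ l, p.1 = k) → (∀ p ∈ l, p.1 = k → p.2 = v) →
      (l.foldl (fun t p => t.insert p.1 p.2) t).get? k = some v := by
  induction l with
  | nil => intro t k v hex _; obtain ⟨p, hp, _⟩ := hex; simp at hp
  | cons a l ih =>
    intro t k v hex hall
    simp only [List.foldl_cons]
    by_cases htail : ∃ p ∈ l, p.1 = k
    · exact ih _ k v htail (fun p hp => hall p (List.mem_cons_of_mem a hp))
    · obtain ⟨p, hp, hpk⟩ := hex
      rcases List.mem_cons.mp hp with rfl | hpl
      · rw [pv_foldl_insert_skip l _ k (fun q hq hqk => htail ⟨q, hq, hqk⟩)]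
        rw [hpk, hall p hp hpk]
        exact PySem.Dict.get?_insert_self _ _ _
      · exact absurd ⟨p, hpl, hpk⟩ htail

-- the insert list of B's table build
def pvPairs (rules : List (String × String)) : List (String × String) :=
  (PySem.Dict.ofList rules).items.flatMap (fun kv => (pvKeyOrbitP kv.1).map (fun s => (s, kv.2)))

theorem pv_inner_step (t : PySem.Dict String String) (kv : String × String) :
    ((PySem.List.pyRange 0 4 1).foldl
      (fun tp _ =>
        (((tp.1.insert (pvJoinRows tp.2) kv.2).insert (pvJoinRows (pvFlipRows tp.2)) kv.2),
         pvRotRows tp.2))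
      (t, pvSplitRows kv.1)).1
    = ((pvKeyOrbitP kv.1).map (fun s => (s, kv.2))).foldl (fun t p => t.insert p.1 p.2) t := by
  rw [show PySem.List.pyRange 0 4 1 = [0,1,2,3] from by decide]
  simp only [List.foldl_cons, List.foldl_nil, pvKeyOrbitP, List.map_cons, List.map_nil,
    pv_splitRows_eq_toPatternArray, pv_splitRowsP_eq_toPatternArray,
    pv_rotRows_eq, pv_rotRowsP_eq, pv_flipRows_eq, pv_flipRowsP_eq,
    pv_joinRows_eq, pv_joinRowsP_eq]

theorem pv_buildTable_go (l : List (String × String)) :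
    ∀ (t : PySem.Dict String String),
      l.foldl (fun t kv =>
        ((PySem.List.pyRange 0 4 1).foldl
          (fun tp _ =>
            (((tp.1.insert (pvJoinRows tp.2) kv.2).insert (pvJoinRows (pvFlipRows tp.2)) kv.2),
             pvRotRows tp.2))
          (t, pvSplitRows kv.1)).1) t
      = (l.flatMap (fun kv => (pvKeyOrbitP kv.1).map (fun s => (s, kv.2)))).foldl
          (fun t p => t.insert p.1 p.2) t := by
  induction l with
  | nil => intro t; rfl
  | cons kv l ih =>
    intro t
    simp only [List.foldl_cons, List.flatMap_cons, List.foldl_append]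
    rw [pv_inner_step, ih]

theorem pv_buildTable_eq (rules : List (String × String)) :
    pvBuildTable rules = (pvPairs rules).foldl (fun t p => t.insert p.1 p.2) PySem.Dict.empty := by
  rw [pvBuildTable, pvPairs, pv_buildTable_go]

-- lookup in B's table: piece in the orbit of some rule, all overlapping rules agreeing
theorem pv_table_get (rules : List (String × String)) (s : String) (v : String)
    (hex : ∃ kv ∈ (PySem.Dict.ofList rules).items, s ∈ pvKeyOrbitP kv.1 ∧ kv.2 = v)
    (hall : ∀ kv ∈ (PySem.Dict.ofList rules).items, s ∈ pvKeyOrbitP kv.1 → kv.2 = v) :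
    (pvBuildTable rules).get? s = some v := by
  rw [pv_buildTable_eq]
  apply pv_foldl_insert_last
  · obtain ⟨kv, hkv, hs, hv⟩ := hex
    exact ⟨(s, v), by
      simp only [pvPairs, List.mem_flatMap]
      exact ⟨kv, hkv, by rw [← hv]; exact List.mem_map_of_mem hs⟩, rfl⟩
  · intro p hp hpk
    simp only [pvPairs, List.mem_flatMap, List.mem_map] at hp
    obtain ⟨kv, hkv, s', hs', heq⟩ := hp
    cases heq
    exact hall kv hkv (hpk ▸ hs')

theorem pv_applyRule_orbit2 (d : PySem.Dict String String) (v : String) (a b x y : Char)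
    (hall : ∀ s ∈ pvOrbit2 a b x y, d.get? s = none ∨ d.get? s = some v)
    (hex : ∃ s ∈ pvOrbit2 a b x y, (d.get? s).isSome)
    (hv : v ≠ "") :
    applyRule [String.ofList [a,b], String.ofList [x,y]] d = some v := by
  have hvb : (v == "") = false := beq_eq_false_iff_ne.mpr hv
  have m0 := hall _ (by simp [pvOrbit2] : String.ofList [a,b,'/',x,y] ∈ pvOrbit2 a b x y)
  have m1 := hall _ (by simp [pvOrbit2] : String.ofList [b,y,'/',a,x] ∈ pvOrbit2 a b x y)
  have m2 := hall _ (by simp [pvOrbit2] : String.ofList [y,b,'/',x,a] ∈ pvOrbit2 a b x y)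
  have m3 := hall _ (by simp [pvOrbit2] : String.ofList [y,x,'/',b,a] ∈ pvOrbit2 a b x y)
  have m4 := hall _ (by simp [pvOrbit2] : String.ofList [x,y,'/',a,b] ∈ pvOrbit2 a b x y)
  have m5 := hall _ (by simp [pvOrbit2] : String.ofList [x,a,'/',y,b] ∈ pvOrbit2 a b x y)
  have m6 := hall _ (by simp [pvOrbit2] : String.ofList [a,x,'/',b,y] ∈ pvOrbit2 a b x y)
  have m7 := hall _ (by simp [pvOrbit2] : String.ofList [b,a,'/',y,x] ∈ pvOrbit2 a b x y)
  rw [applyRule, show (4:Nat) = 3+1 from rfl]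
  rcases m0 with h0 | h0
  case inr => simp only [applyRuleGo, pvTruthyStr, pv_join2_ofList, h0]; simp [hvb]
  rcases m1 with h1 | h1
  case inr => simp only [applyRuleGo, pvTruthyStr, pv_rot2, pv_join2_ofList, h0, h1]; simp [hvb]
  rcases m2 with h2 | h2
  case inr => simp only [applyRuleGo, pvTruthyStr, pv_rot2, pv_flip2, pv_join2_ofList, h0, h1, h2]; simp [hvb]
  rcases m3 with h3 | h3
  case inr => simp only [applyRuleGo, pvTruthyStr, pv_rot2, pv_flip2, pv_join2_ofList, h0, h1, h2, h3]; simp [hvb]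
  rcases m4 with h4 | h4
  case inr => simp only [applyRuleGo, pvTruthyStr, pv_rot2, pv_flip2, pv_join2_ofList, h0, h1, h2, h3, h4]; simp [hvb]
  rcases m5 with h5 | h5
  case inr => simp only [applyRuleGo, pvTruthyStr, pv_rot2, pv_flip2, pv_join2_ofList, h0, h1, h2, h3, h4, h5]; simp [hvb]
  rcases m6 with h6 | h6
  case inr => simp only [applyRuleGo, pvTruthyStr, pv_rot2, pv_flip2, pv_join2_ofList, h0, h1, h2, h3, h4, h5, h6]; simp [hvb]
  rcases m7 with h7 | h7
  case inr => simp only [applyRuleGo, pvTruthyStr, pv_rot2, pv_flip2, pv_join2_ofList, h0, h1, h2, h3, h4, h5, h6, h7]; simp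
  exfalso
  obtain ⟨s, hs, hsome⟩ := hex
  simp only [pvOrbit2, List.mem_cons, List.not_mem_nil, or_false] at hs
  rcases hs with rfl | rfl | rfl | rfl | rfl | rfl | rfl | rfl <;>
    simp_all

theorem pv_applyRule_orbit3 (d : PySem.Dict String String) (v : String) (a b c x y z u w t : Char)
    (hall : ∀ s ∈ pvOrbit3 a b c x y z u w t, d.get? s = none ∨ d.get? s = some v)
    (hex : ∃ s ∈ pvOrbit3 a b c x y z u w t, (d.get? s).isSome)
    (hv : v ≠ "") :
    applyRule [String.ofList [a,b,c], String.ofList [x,y,z], String.ofList [u,w,t]] d = some v := by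
  have hvb : (v == "") = false := beq_eq_false_iff_ne.mpr hv
  have m0 := hall _ (by simp [pvOrbit3] : String.ofList [a,b,c,'/',x,y,z,'/',u,w,t] ∈ pvOrbit3 a b c x y z u w t)
  have m1 := hall _ (by simp [pvOrbit3] : String.ofList [c,z,t,'/',b,y,w,'/',a,x,u] ∈ pvOrbit3 a b c x y z u w t)
  have m2 := hall _ (by simp [pvOrbit3] : String.ofList [t,z,c,'/',w,y,b,'/',u,x,a] ∈ pvOrbit3 a b c x y z u w t)
  have m3 := hall _ (by simp [pvOrbit3] : String.ofList [t,w,u,'/',z,y,x,'/',c,b,a] ∈ pvOrbit3 a b c x y z u w t)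
  have m4 := hall _ (by simp [pvOrbit3] : String.ofList [u,w,t,'/',x,y,z,'/',a,b,c] ∈ pvOrbit3 a b c x y z u w t)
  have m5 := hall _ (by simp [pvOrbit3] : String.ofList [u,x,a,'/',w,y,b,'/',t,z,c] ∈ pvOrbit3 a b c x y z u w t)
  have m6 := hall _ (by simp [pvOrbit3] : String.ofList [a,x,u,'/',b,y,w,'/',c,z,t] ∈ pvOrbit3 a b c x y z u w t)
  have m7 := hall _ (by simp [pvOrbit3] : String.ofList [c,b,a,'/',z,y,x,'/',t,w,u] ∈ pvOrbit3 a b c x y z u w t)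
  rw [applyRule, show (4:Nat) = 3+1 from rfl]
  rcases m0 with h0 | h0
  case inr => simp only [applyRuleGo, pvTruthyStr, pv_join3_ofList, h0]; simp [hvb]
  rcases m1 with h1 | h1
  case inr => simp only [applyRuleGo, pvTruthyStr, pv_rot3, pv_join3_ofList, h0, h1]; simp [hvb]
  rcases m2 with h2 | h2
  case inr => simp only [applyRuleGo, pvTruthyStr, pv_rot3, pv_flip3, pv_join3_ofList, h0, h1, h2]; simp [hvb]
  rcases m3 with h3 | h3
  case inr => simp only [applyRuleGo, pvTruthyStr, pv_rot3, pv_flip3, pv_join3_ofList, h0, h1, h2, h3]; simp [hvb]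
  rcases m4 with h4 | h4
  case inr => simp only [applyRuleGo, pvTruthyStr, pv_rot3, pv_flip3, pv_join3_ofList, h0, h1, h2, h3, h4]; simp [hvb]
  rcases m5 with h5 | h5
  case inr => simp only [applyRuleGo, pvTruthyStr, pv_rot3, pv_flip3, pv_join3_ofList, h0, h1, h2, h3, h4, h5]; simp [hvb]
  rcases m6 with h6 | h6
  case inr => simp only [applyRuleGo, pvTruthyStr, pv_rot3, pv_flip3, pv_join3_ofList, h0, h1, h2, h3, h4, h5, h6]; simp [hvb]
  rcases m7 with h7 | h7
  case inr => simp only [applyRuleGo, pvTruthyStr, pv_rot3, pv_flip3, pv_join3_ofList, h0, h1, h2, h3, h4, h5, h6, h7]; simp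
  exfalso
  obtain ⟨s, hs, hsome⟩ := hex
  simp only [pvOrbit3, List.mem_cons, List.not_mem_nil, or_false] at hs
  rcases hs with rfl | rfl | rfl | rfl | rfl | rfl | rfl | rfl <;>
    simp_all

-- value shape facts
theorem pv_valOK_parts (C : List Char) (m : Nat) (v : String) (hm : 2 ≤ m)
    (h : pvValOK C m v = true) :
    v ≠ "" ∧ (toPatternArray v).length = m ∧
      ∀ p ∈ toPatternArray v, p.toList.length = m ∧ ∀ c ∈ p.toList, c ∈ C := by
  simp only [pvValOK, Bool.and_eq_true, beq_iff_eq, List.all_eq_true] at h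
  obtain ⟨hlen, hall⟩ := h
  rw [pv_toPatternArray_eq]
  refine ⟨?_, by simpa using hlen, ?_⟩
  · intro hv
    have hvl : v.toList = [] := by rw [hv]; rfl
    rw [hvl, show PySem.Chars.splitOn ([] : List Char) ['/'] = [[]] from by decide] at hlen
    simp at hlen; omega
  · intro p hp
    obtain ⟨q, hq, rfl⟩ := List.mem_map.mp hp
    have hc := hall q hq
    simp only [pvChunkOK, Bool.and_eq_true, beq_iff_eq, List.all_eq_true] at hc
    refine ⟨by simpa [String.toList_ofList] using hc.1, ?_⟩
    intro c hcc
    rw [String.toList_ofList] at hcc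
    simpa using hc.2 c hcc

-- conflict-freedom applied to two rules whose orientation images share a string
theorem pv_cf_apply (d : PySem.Dict String String) (hCF : pvConflictFree d = true)
    (kv1 kv2 : String × String) (h1 : kv1 ∈ d.items) (h2 : kv2 ∈ d.items)
    (s : String) (hs1 : s ∈ pvKeyOrbitP kv1.1) (hs2 : s ∈ pvKeyOrbitP kv2.1) :
    kv1.2 = kv2.2 := by
  simp only [pvConflictFree, List.all_eq_true] at hCF
  have h := hCF kv1 h1 kv2 h2
  rcases Bool.or_eq_true_iff.mp h with h | h
  · exfalso
    rw [List.all_eq_true] at h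
    have := h s hs1
    simp only [Bool.not_eq_eq_eq_not, Bool.not_true, List.contains_eq_mem,
      decide_eq_false_iff_not] at this
    exact this hs2
  · exact beq_iff_eq.mp h

-- every orientation of a '/'-free 2x2 (3x3) pattern is a shaped key string
theorem pv_shape2_of_orbit (a b x y : Char) (ha : a ≠ '/') (hb : b ≠ '/') (hx : x ≠ '/') (hy : y ≠ '/') :
    ∀ s ∈ pvOrbit2 a b x y, pvShape2 s = true := by
  intro s hs
  simp only [pvOrbit2, List.mem_cons, List.not_mem_nil, or_false] at hs
  rcases hs with rfl | rfl | rfl | rfl | rfl | rfl | rfl | rfl <;>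
    simp [pvShape2, String.toList_ofList, ha, hb, hx, hy]

theorem pv_shape3_of_orbit (a b c x y z u w t : Char) (ha : a ≠ '/') (hb : b ≠ '/') (hc : c ≠ '/')
    (hx : x ≠ '/') (hy : y ≠ '/') (hz : z ≠ '/') (hu : u ≠ '/') (hw : w ≠ '/') (ht : t ≠ '/') :
    ∀ s ∈ pvOrbit3 a b c x y z u w t, pvShape3 s = true := by
  intro s hs
  simp only [pvOrbit3, List.mem_cons, List.not_mem_nil, or_false] at hs
  rcases hs with rfl | rfl | rfl | rfl | rfl | rfl | rfl | rfl <;>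
    simp [pvShape3, String.toList_ofList, ha, hb, hc, hx, hy, hz, hu, hw, ht]

-- no shaped 2x2 string is a shaped 3x3 string (lengths differ) — via pvRulesOK
theorem pv_rulesOK_val2 (d : PySem.Dict String String) (C : List Char)
    (hOK : pvRulesOK d C = true) (kv : String × String) (hkv : kv ∈ d.items)
    (hs : pvShape2 kv.1 = true) : pvValOK C 3 kv.2 = true := by
  simp only [pvRulesOK, List.all_eq_true] at hOK
  have := hOK kv hkv
  simp only [Bool.and_eq_true, Bool.or_eq_true_iff, Bool.not_eq_eq_eq_not, Bool.not_true] at this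
  rcases this.1 with h | h
  · rw [hs] at h; cases h
  · exact h

theorem pv_rulesOK_val3 (d : PySem.Dict String String) (C : List Char)
    (hOK : pvRulesOK d C = true) (kv : String × String) (hkv : kv ∈ d.items)
    (hs : pvShape3 kv.1 = true) : pvValOK C 4 kv.2 = true := by
  simp only [pvRulesOK, List.all_eq_true] at hOK
  have := hOK kv hkv
  simp only [Bool.and_eq_true, Bool.or_eq_true_iff, Bool.not_eq_eq_eq_not, Bool.not_true] at this
  rcases this.2 with h | h
  · rw [hs] at h; cases h
  · exact h
theorem pv_match2 (rules : List (String × String)) (C : List Char) (hC : '/' ∉ C)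
    (hOK : pvRulesOK (PySem.Dict.ofList rules) C = true)
    (hCF : pvConflictFree (PySem.Dict.ofList rules) = true)
    (h2 : pvComplete2 (PySem.Dict.ofList rules) C = true)
    (s0 s1 : String)
    (h0l : s0.toList.length = 2) (h0c : ∀ ch ∈ s0.toList, ch ∈ C)
    (h1l : s1.toList.length = 2) (h1c : ∀ ch ∈ s1.toList, ch ∈ C) :
    ∃ v, pvValOK C 3 v = true ∧ applyRule [s0, s1] (PySem.Dict.ofList rules) = some v ∧
      (pvBuildTable rules).get? (toPatternString [s0, s1]) = some v := by
  obtain ⟨a, b, h0⟩ := List.length_eq_two.mp h0l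
  obtain ⟨x, y, h1⟩ := List.length_eq_two.mp h1l
  have hs0 : s0 = String.ofList [a, b] := by rw [← String.ofList_toList (s := s0), h0]
  have hs1 : s1 = String.ofList [x, y] := by rw [← String.ofList_toList (s := s1), h1]
  subst hs0; subst hs1
  rw [String.toList_ofList] at h0c h1c
  have haC : a ∈ C := h0c a (by simp)
  have hbC : b ∈ C := h0c b (by simp)
  have hxC : x ∈ C := h1c x (by simp)
  have hyC : y ∈ C := h1c y (by simp)
  have ha : a ≠ '/' := fun h => hC (h ▸ haC)
  have hb : b ≠ '/' := fun h => hC (h ▸ hbC)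
  have hx : x ≠ '/' := fun h => hC (h ▸ hxC)
  have hy : y ≠ '/' := fun h => hC (h ▸ hyC)
  -- completeness: some orientation of the piece is a key
  have hcomp : ∃ s ∈ pvOrbit2 a b x y, ((PySem.Dict.ofList rules).get? s).isSome := by
    simp only [pvComplete2, List.all_eq_true] at h2
    have := h2 a haC b hbC x hxC y hyC
    simpa [List.any_eq_true] using this
  obtain ⟨s₀, hs₀orb, hs₀some⟩ := hcomp
  obtain ⟨v, hv⟩ := Option.isSome_iff_exists.mp hs₀some
  have hitem₀ : (s₀, v) ∈ (PySem.Dict.ofList rules).items :=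
    PySem.Dict.mem_items_of_get?_eq_some _ hv
  have hval : pvValOK C 3 v = true :=
    pv_rulesOK_val2 _ C hOK (s₀, v) hitem₀ (pv_shape2_of_orbit a b x y ha hb hx hy s₀ hs₀orb)
  have hvne : v ≠ "" := (pv_valOK_parts C 3 v (by omega) hval).1
  have hbase₀ : String.ofList [a,b,'/',x,y] ∈ pvKeyOrbitP s₀ :=
    pv_orbit2_sym a b x y ha hb hx hy s₀ hs₀orb
  -- every matched orientation carries the same value v
  have hall : ∀ s ∈ pvOrbit2 a b x y,
      (PySem.Dict.ofList rules).get? s = none ∨ (PySem.Dict.ofList rules).get? s = some v := by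
    intro s hsorb
    cases hg : (PySem.Dict.ofList rules).get? s with
    | none => exact Or.inl rfl
    | some v' =>
      refine Or.inr ?_
      have hitem' : (s, v') ∈ (PySem.Dict.ofList rules).items :=
        PySem.Dict.mem_items_of_get?_eq_some _ hg
      have := pv_cf_apply _ hCF (s, v') (s₀, v) hitem' hitem₀
        (String.ofList [a,b,'/',x,y]) (pv_orbit2_sym a b x y ha hb hx hy s hsorb) hbase₀
      simp only at this
      rw [this]
  refine ⟨v, hval, ?_, ?_⟩
  · exact pv_applyRule_orbit2 _ v a b x y hall ⟨s₀, hs₀orb, hs₀some⟩ hvne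
  · rw [pv_join2_ofList]
    apply pv_table_get
    · exact ⟨(s₀, v), hitem₀, hbase₀, rfl⟩
    · intro kv hkv hmem
      exact pv_cf_apply _ hCF kv (s₀, v) hkv hitem₀ _ hmem hbase₀
theorem pv_match3 (rules : List (String × String)) (C : List Char) (hC : '/' ∉ C)
    (hOK : pvRulesOK (PySem.Dict.ofList rules) C = true)
    (hCF : pvConflictFree (PySem.Dict.ofList rules) = true)
    (h3 : pvComplete3 (PySem.Dict.ofList rules) C = true)
    (s0 s1 s2 : String)
    (h0l : s0.toList.length = 3) (h0c : ∀ ch ∈ s0.toList, ch ∈ C)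
    (h1l : s1.toList.length = 3) (h1c : ∀ ch ∈ s1.toList, ch ∈ C)
    (h2l : s2.toList.length = 3) (h2c : ∀ ch ∈ s2.toList, ch ∈ C) :
    ∃ v, pvValOK C 4 v = true ∧ applyRule [s0, s1, s2] (PySem.Dict.ofList rules) = some v ∧
      (pvBuildTable rules).get? (toPatternString [s0, s1, s2]) = some v := by
  obtain ⟨a, b, c, h0⟩ := List.length_eq_three.mp h0l
  obtain ⟨x, y, z, h1⟩ := List.length_eq_three.mp h1l
  obtain ⟨u, w, t, h2⟩ := List.length_eq_three.mp h2l
  have hs0 : s0 = String.ofList [a, b, c] := by rw [← String.ofList_toList (s := s0), h0]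
  have hs1 : s1 = String.ofList [x, y, z] := by rw [← String.ofList_toList (s := s1), h1]
  have hs2 : s2 = String.ofList [u, w, t] := by rw [← String.ofList_toList (s := s2), h2]
  subst hs0; subst hs1; subst hs2
  rw [String.toList_ofList] at h0c h1c h2c
  have haC : a ∈ C := h0c a (by simp)
  have hbC : b ∈ C := h0c b (by simp)
  have hcC : c ∈ C := h0c c (by simp)
  have hxC : x ∈ C := h1c x (by simp)
  have hyC : y ∈ C := h1c y (by simp)
  have hzC : z ∈ C := h1c z (by simp)
  have huC : u ∈ C := h2c u (by simp)
  have hwC : w ∈ C := h2c w (by simp)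
  have htC : t ∈ C := h2c t (by simp)
  have ha : a ≠ '/' := fun h => hC (h ▸ haC)
  have hb : b ≠ '/' := fun h => hC (h ▸ hbC)
  have hc : c ≠ '/' := fun h => hC (h ▸ hcC)
  have hx : x ≠ '/' := fun h => hC (h ▸ hxC)
  have hy : y ≠ '/' := fun h => hC (h ▸ hyC)
  have hz : z ≠ '/' := fun h => hC (h ▸ hzC)
  have hu : u ≠ '/' := fun h => hC (h ▸ huC)
  have hw : w ≠ '/' := fun h => hC (h ▸ hwC)
  have ht : t ≠ '/' := fun h => hC (h ▸ htC)
  have hcomp : ∃ s ∈ pvOrbit3 a b c x y z u w t, ((PySem.Dict.ofList rules).get? s).isSome := by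
    simp only [pvComplete3, List.all_eq_true] at h3
    have := h3 a haC b hbC c hcC x hxC y hyC z hzC u huC w hwC t htC
    simpa [List.any_eq_true] using this
  obtain ⟨s₀, hs₀orb, hs₀some⟩ := hcomp
  obtain ⟨v, hv⟩ := Option.isSome_iff_exists.mp hs₀some
  have hitem₀ : (s₀, v) ∈ (PySem.Dict.ofList rules).items :=
    PySem.Dict.mem_items_of_get?_eq_some _ hv
  have hval : pvValOK C 4 v = true :=
    pv_rulesOK_val3 _ C hOK (s₀, v) hitem₀
      (pv_shape3_of_orbit a b c x y z u w t ha hb hc hx hy hz hu hw ht s₀ hs₀orb)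
  have hvne : v ≠ "" := (pv_valOK_parts C 4 v (by omega) hval).1
  have hbase₀ : String.ofList [a,b,c,'/',x,y,z,'/',u,w,t] ∈ pvKeyOrbitP s₀ :=
    pv_orbit3_sym a b c x y z u w t ha hb hc hx hy hz hu hw ht s₀ hs₀orb
  have hall : ∀ s ∈ pvOrbit3 a b c x y z u w t,
      (PySem.Dict.ofList rules).get? s = none ∨ (PySem.Dict.ofList rules).get? s = some v := by
    intro s hsorb
    cases hg : (PySem.Dict.ofList rules).get? s with
    | none => exact Or.inl rfl
    | some v' =>
      refine Or.inr ?_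
      have hitem' : (s, v') ∈ (PySem.Dict.ofList rules).items :=
        PySem.Dict.mem_items_of_get?_eq_some _ hg
      have := pv_cf_apply _ hCF (s, v') (s₀, v) hitem' hitem₀
        (String.ofList [a,b,c,'/',x,y,z,'/',u,w,t])
        (pv_orbit3_sym a b c x y z u w t ha hb hc hx hy hz hu hw ht s hsorb) hbase₀
      simp only at this
      rw [this]
  refine ⟨v, hval, ?_, ?_⟩
  · exact pv_applyRule_orbit3 _ v a b c x y z u w t hall ⟨s₀, hs₀orb, hs₀some⟩ hvne
  · rw [pv_join3_ofList]
    apply pv_table_get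
    · exact ⟨(s₀, v), hitem₀, hbase₀, rfl⟩
    · intro kv hkv hmem
      exact pv_cf_apply _ hCF kv (s₀, v) hkv hitem₀ _ hmem hbase₀

-- canonical Nat-indexed form of the piece-assembly loop shared by both ports
def pvAsm (B' r : Nat) (chunk : Nat → Nat → String) : List String :=
  (List.range (B' * B')).foldl (fun ns j =>
    (List.range r).foldl (fun ns k =>
      ns.set (r * (j / B') + k) (ns.getD (r * (j / B') + k) "" ++ chunk j k)) ns)
    (List.replicate (r * B') "")

-- one piece's inner update loop: appends w k to rows r*q0+k, k < t, leaves the rest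
theorem pv_inner_upd (r q0 : Nat) (w : Nat → String) (t : Nat) (ns : List String) :
    ((List.range t).foldl (fun ns k => ns.set (r*q0+k) (ns.getD (r*q0+k) "" ++ w k)) ns).length = ns.length ∧
    ∀ i, i < ns.length →
      ((List.range t).foldl (fun ns k => ns.set (r*q0+k) (ns.getD (r*q0+k) "" ++ w k)) ns).getD i "" =
        if r*q0 ≤ i ∧ i < r*q0 + t then ns.getD i "" ++ w (i - r*q0) else ns.getD i "" := by
  induction t with
  | zero => simp
  | succ t ih =>
    rw [List.range_succ, List.foldl_append, List.foldl_cons, List.foldl_nil]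
    obtain ⟨ihlen, ihget⟩ := ih
    refine ⟨by rw [List.length_set, ihlen], ?_⟩
    intro i hi
    rw [List.getD_eq_getElem?_getD, List.getElem?_set]
    by_cases hit : r*q0 + t = i
    · subst hit
      rw [if_pos rfl, if_pos (by rw [ihlen]; omega)]
      rw [Option.getD_some, ihget (r*q0+t) hi, if_neg (by omega)]
      rw [if_pos (by omega), show r*q0+t - r*q0 = t from by omega]
    · rw [if_neg hit, ← List.getD_eq_getElem?_getD, ihget i hi]
      by_cases hin : r*q0 ≤ i ∧ i < r*q0 + t
      · rw [if_pos hin, if_pos (by omega)]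
      · rw [if_neg hin, if_neg (by omega)]

-- invariant: after m pieces, block-row q of the output holds min B' (m - q*B') chunks
theorem pvAsm_inv (B' r : Nat) (C : List Char) (chunk : Nat → Nat → String)
    (hch : ∀ j, j < B'*B' → ∀ k, k < r →
      (chunk j k).toList.length = r ∧ ∀ c ∈ (chunk j k).toList, c ∈ C) :
    ∀ m, m ≤ B'*B' →
      ((List.range m).foldl (fun ns j =>
        (List.range r).foldl (fun ns k =>
          ns.set (r * (j / B') + k) (ns.getD (r * (j / B') + k) "" ++ chunk j k)) ns)
        (List.replicate (r * B') "")).length = r * B' ∧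
      ∀ q k, q < B' → k < r →
        (((List.range m).foldl (fun ns j =>
          (List.range r).foldl (fun ns k =>
            ns.set (r * (j / B') + k) (ns.getD (r * (j / B') + k) "" ++ chunk j k)) ns)
          (List.replicate (r * B') "")).getD (r*q+k) "").toList.length
            = r * (min B' (m - q*B')) ∧
        ∀ c ∈ (((List.range m).foldl (fun ns j =>
          (List.range r).foldl (fun ns k =>
            ns.set (r * (j / B') + k) (ns.getD (r * (j / B') + k) "" ++ chunk j k)) ns)
          (List.replicate (r * B') "")).getD (r*q+k) "").toList, c ∈ C := by
  intro m
  induction m with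
  | zero =>
    intro _
    simp only [List.range_zero, List.foldl_nil]
    refine ⟨by simp, ?_⟩
    intro q k hq hk
    have hidx : r*q+k < r*B' := by
      have h1 : r*q + k < r*(q+1) := by rw [Nat.mul_succ]; omega
      have h2 : r*(q+1) ≤ r*B' := Nat.mul_le_mul_left r (by omega)
      omega
    rw [List.getD_eq_getElem?_getD, List.getElem?_replicate, if_pos (by simpa using hidx)]
    simp
  | succ m ih =>
    intro hm
    obtain ⟨ihlen, ihget⟩ := ih (by omega)
    have hB : 0 < B' := by
      rcases Nat.eq_zero_or_pos B' with h | h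
      · rw [h] at hm; simp at hm
      · exact h
    rw [List.range_succ, List.foldl_append, List.foldl_cons, List.foldl_nil]
    obtain ⟨ulen, uget⟩ := pv_inner_upd r (m / B') (fun k => chunk m k) r
      ((List.range m).foldl (fun ns j =>
        (List.range r).foldl (fun ns k =>
          ns.set (r * (j / B') + k) (ns.getD (r * (j / B') + k) "" ++ chunk j k)) ns)
        (List.replicate (r * B') ""))
    refine ⟨by rw [ulen, ihlen], ?_⟩
    intro q k hq hk
    have hr : 0 < r := by omega
    have hidx : r*q+k < r*B' := by
      have h1 : r*q + k < r*(q+1) := by rw [Nat.mul_succ]; omega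
      have h2 : r*(q+1) ≤ r*B' := Nat.mul_le_mul_left r (by omega)
      omega
    have hdm := Nat.div_add_mod m B'
    have hmod : m % B' < B' := Nat.mod_lt _ hB
    have hcq : q * B' = B' * q := Nat.mul_comm _ _
    have hcq0 : (m / B') * B' = B' * (m / B') := Nat.mul_comm _ _
    rw [uget (r*q+k) (by rw [ihlen]; exact hidx)]
    by_cases hqq : q = m / B'
    · rw [if_pos (by rw [← hqq]; omega)]
      rw [show r*q+k - r*(m/B') = k from by rw [← hqq]; omega]
      obtain ⟨glen, gchars⟩ := ihget q k hq hk
      have hcc := hch m hm k hk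
      have hmin1 : min B' (m - q*B') = m % B' := by rw [hcq, hqq]; omega
      have hmin2 : min B' (m + 1 - q*B') = m % B' + 1 := by rw [hcq, hqq]; omega
      constructor
      · rw [String.toList_append, List.length_append, glen, hcc.1, hmin1, hmin2, Nat.mul_succ]
      · intro c hc
        rw [String.toList_append] at hc
        rcases List.mem_append.mp hc with h | h
        · exact gchars c h
        · exact hcc.2 c h
    · have hcond : ¬(r*(m/B') ≤ r*q+k ∧ r*q+k < r*(m/B') + r) := by
        rintro ⟨hle, hlt⟩
        apply hqq
        rcases lt_trichotomy q (m/B') with h | h | h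
        · exfalso
          have h2 : r*(q+1) ≤ r*(m/B') := Nat.mul_le_mul_left r (by omega)
          rw [Nat.mul_succ] at h2; omega
        · exact h
        · exfalso
          have h2 : r*(m/B'+1) ≤ r*q := Nat.mul_le_mul_left r (by omega)
          rw [Nat.mul_succ] at h2; omega
      rw [if_neg hcond]
      obtain ⟨glen, gchars⟩ := ihget q k hq hk
      have hmin : min B' (m + 1 - q*B') = min B' (m - q*B') := by
        rcases Nat.lt_or_ge q (m/B') with h | h
        · have h2 : B'*(q+1) ≤ B'*(m/B') := Nat.mul_le_mul_left B' (by omega)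
          rw [Nat.mul_succ] at h2; omega
        · have h3 : q ≠ m / B' := hqq
          have h4 : m / B' < q := by omega
          have h2 : B'*(m/B'+1) ≤ B'*q := Nat.mul_le_mul_left B' (by omega)
          rw [Nat.mul_succ] at h2; omega
      rw [glen, hmin]
      exact ⟨rfl, gchars⟩

-- the finished assembly is a square (r*B') x (r*B') grid over C
theorem pvAsm_spec (B' r : Nat) (C : List Char) (chunk : Nat → Nat → String) (hr : 0 < r)
    (hch : ∀ j, j < B'*B' → ∀ k, k < r →
      (chunk j k).toList.length = r ∧ ∀ c ∈ (chunk j k).toList, c ∈ C) :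
    (pvAsm B' r chunk).length = r * B' ∧
    ∀ row ∈ pvAsm B' r chunk, row.toList.length = r * B' ∧ ∀ c ∈ row.toList, c ∈ C := by
  obtain ⟨hlen, hget⟩ := pvAsm_inv B' r C chunk hch (B'*B') le_rfl
  refine ⟨hlen, ?_⟩
  intro row hrow
  obtain ⟨i, hi, hieq⟩ := List.getElem_of_mem hrow
  have hiL : i < r * B' := by rw [← hlen]; exact hi
  have hq : i / r < B' := by
    rcases Nat.lt_or_ge (i / r) B' with h | h
    · exact h
    · exfalso
      have h2 : r * B' ≤ r * (i / r) := Nat.mul_le_mul_left r h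
      have h3 : r * (i / r) ≤ i := Nat.mul_div_le i r
      omega
  have hk : i % r < r := Nat.mod_lt _ hr
  have hi2 : i = r * (i / r) + i % r := by
    have := Nat.div_add_mod i r; omega
  obtain ⟨glen, gchars⟩ := hget (i / r) (i % r) hq hk
  have hrow' : row = (pvAsm B' r chunk).getD (r * (i / r) + i % r) "" := by
    rw [← hi2, List.getD_eq_getElem?_getD, List.getElem?_eq_getElem hi, hieq, Option.getD_some]
  have hmin : min B' (B'*B' - (i / r)*B') = B' := by
    have h2 : B'*(i/r+1) ≤ B'*B' := Nat.mul_le_mul_left B' (by omega)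
    rw [Nat.mul_succ] at h2
    have hc : (i/r)*B' = B'*(i/r) := Nat.mul_comm _ _
    omega
  rw [hrow']
  unfold pvAsm
  exact ⟨by rw [glen, hmin], gchars⟩

-- the rows produced for piece j, read from B's table
def pvChunkF2 (t : PySem.Dict String String) (g : List String) (B' : Nat) (j k : Nat) : String :=
  (toPatternArray ((t.get? (toPatternString
      [String.ofList (((g.getD (2*(j/B')) "").toList.drop (2*(j%B'))).take 2),
       String.ofList (((g.getD (2*(j/B')+1) "").toList.drop (2*(j%B'))).take 2)])).getD "")).getD k ""

def pvChunkF3 (t : PySem.Dict String String) (g : List String) (B' : Nat) (j k : Nat) : String :=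
  (toPatternArray ((t.get? (toPatternString
      [String.ofList (((g.getD (3*(j/B')) "").toList.drop (3*(j%B'))).take 3),
       String.ofList (((g.getD (3*(j/B')+1) "").toList.drop (3*(j%B'))).take 3),
       String.ofList (((g.getD (3*(j/B')+2) "").toList.drop (3*(j%B'))).take 3)])).getD "")).getD k ""

-- a bs-wide slice of a grid row is a bs-chunk over C
theorem pv_sliceRow_spec (C : List Char) (g : List String)
    (hgrid : ∀ row ∈ g, row.toList.length = g.length ∧ ∀ c ∈ row.toList, c ∈ C)
    (bs B' : Nat) (hn : g.length = bs*B') (i c : Nat) (hi : i < bs*B') (hc : c + bs ≤ bs*B') :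
    (String.ofList (((g.getD i "").toList.drop c).take bs)).toList.length = bs ∧
    ∀ ch ∈ (String.ofList (((g.getD i "").toList.drop c).take bs)).toList, ch ∈ C := by
  have hrow : g.getD i "" ∈ g := by
    rw [List.getD_eq_getElem?_getD, List.getElem?_eq_getElem (by omega : i < g.length),
      Option.getD_some]
    exact List.getElem_mem _
  obtain ⟨hrl, hrc⟩ := hgrid _ hrow
  rw [String.toList_ofList]
  constructor
  · rw [List.length_take, List.length_drop, hrl, hn]; omega
  · intro ch hch
    exact hrc ch (List.mem_of_mem_drop (List.mem_of_mem_take hch))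

-- per-piece resolution on the grid, even case
theorem pv_resolve2 (rules : List (String × String)) (C : List Char) (hC : '/' ∉ C)
    (hOK : pvRulesOK (PySem.Dict.ofList rules) C = true)
    (hCF : pvConflictFree (PySem.Dict.ofList rules) = true)
    (h2 : pvComplete2 (PySem.Dict.ofList rules) C = true)
    (g : List String)
    (hgrid : ∀ row ∈ g, row.toList.length = g.length ∧ ∀ c ∈ row.toList, c ∈ C)
    (B' : Nat) (hB : 0 < B') (hn : g.length = 2*B') (j : Nat) (hj : j < B'*B') :
    ∃ v, pvValOK C 3 v = true ∧
      applyRule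
        [String.ofList (((g.getD (2*(j/B')) "").toList.drop (2*(j%B'))).take 2),
         String.ofList (((g.getD (2*(j/B')+1) "").toList.drop (2*(j%B'))).take 2)]
        (PySem.Dict.ofList rules) = some v ∧
      (pvBuildTable rules).get? (toPatternString
        [String.ofList (((g.getD (2*(j/B')) "").toList.drop (2*(j%B'))).take 2),
         String.ofList (((g.getD (2*(j/B')+1) "").toList.drop (2*(j%B'))).take 2)]) = some v := by
  have hq : j / B' < B' := by
    rw [Nat.div_lt_iff_lt_mul hB]; omega
  have hm : j % B' < B' := Nat.mod_lt _ hB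
  have hi0 : 2*(j/B') < 2*B' := by omega
  have hi1 : 2*(j/B')+1 < 2*B' := by omega
  have hc : 2*(j%B') + 2 ≤ 2*B' := by omega
  obtain ⟨hl0, hc0⟩ := pv_sliceRow_spec C g hgrid 2 B' hn (2*(j/B')) (2*(j%B')) hi0 hc
  obtain ⟨hl1, hc1⟩ := pv_sliceRow_spec C g hgrid 2 B' hn (2*(j/B')+1) (2*(j%B')) hi1 hc
  exact pv_match2 rules C hC hOK hCF h2 _ _ hl0 hc0 hl1 hc1

-- per-piece resolution on the grid, odd case
theorem pv_resolve3 (rules : List (String × String)) (C : List Char) (hC : '/' ∉ C)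
    (hOK : pvRulesOK (PySem.Dict.ofList rules) C = true)
    (hCF : pvConflictFree (PySem.Dict.ofList rules) = true)
    (h3 : pvComplete3 (PySem.Dict.ofList rules) C = true)
    (g : List String)
    (hgrid : ∀ row ∈ g, row.toList.length = g.length ∧ ∀ c ∈ row.toList, c ∈ C)
    (B' : Nat) (hB : 0 < B') (hn : g.length = 3*B') (j : Nat) (hj : j < B'*B') :
    ∃ v, pvValOK C 4 v = true ∧
      applyRule
        [String.ofList (((g.getD (3*(j/B')) "").toList.drop (3*(j%B'))).take 3),
         String.ofList (((g.getD (3*(j/B')+1) "").toList.drop (3*(j%B'))).take 3),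
         String.ofList (((g.getD (3*(j/B')+2) "").toList.drop (3*(j%B'))).take 3)]
        (PySem.Dict.ofList rules) = some v ∧
      (pvBuildTable rules).get? (toPatternString
        [String.ofList (((g.getD (3*(j/B')) "").toList.drop (3*(j%B'))).take 3),
         String.ofList (((g.getD (3*(j/B')+1) "").toList.drop (3*(j%B'))).take 3),
         String.ofList (((g.getD (3*(j/B')+2) "").toList.drop (3*(j%B'))).take 3)]) = some v := by
  have hq : j / B' < B' := by
    rw [Nat.div_lt_iff_lt_mul hB]; omega
  have hm : j % B' < B' := Nat.mod_lt _ hB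
  have hi0 : 3*(j/B') < 3*B' := by omega
  have hi1 : 3*(j/B')+1 < 3*B' := by omega
  have hi2 : 3*(j/B')+2 < 3*B' := by omega
  have hc : 3*(j%B') + 3 ≤ 3*B' := by omega
  obtain ⟨hl0, hc0⟩ := pv_sliceRow_spec C g hgrid 3 B' hn (3*(j/B')) (3*(j%B')) hi0 hc
  obtain ⟨hl1, hc1⟩ := pv_sliceRow_spec C g hgrid 3 B' hn (3*(j/B')+1) (3*(j%B')) hi1 hc
  obtain ⟨hl2, hc2⟩ := pv_sliceRow_spec C g hgrid 3 B' hn (3*(j/B')+2) (3*(j%B')) hi2 hc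
  exact pv_match3 rules C hC hOK hCF h3 _ _ _ hl0 hc0 hl1 hc1 hl2 hc2

-- the chunk functions deliver (bs+1)-chunks over C
theorem pv_chunkF2_spec (rules : List (String × String)) (C : List Char) (hC : '/' ∉ C)
    (hOK : pvRulesOK (PySem.Dict.ofList rules) C = true)
    (hCF : pvConflictFree (PySem.Dict.ofList rules) = true)
    (h2 : pvComplete2 (PySem.Dict.ofList rules) C = true)
    (g : List String)
    (hgrid : ∀ row ∈ g, row.toList.length = g.length ∧ ∀ c ∈ row.toList, c ∈ C)
    (B' : Nat) (hB : 0 < B') (hn : g.length = 2*B') :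
    ∀ j, j < B'*B' → ∀ k, k < 3 →
      (pvChunkF2 (pvBuildTable rules) g B' j k).toList.length = 3 ∧
      ∀ c ∈ (pvChunkF2 (pvBuildTable rules) g B' j k).toList, c ∈ C := by
  intro j hj k hk
  obtain ⟨v, hval, -, htab⟩ := pv_resolve2 rules C hC hOK hCF h2 g hgrid B' hB hn j hj
  obtain ⟨-, hplen, hparts⟩ := pv_valOK_parts C 3 v (by omega) hval
  unfold pvChunkF2
  rw [htab, Option.getD_some]
  have hmem : (toPatternArray v).getD k "" ∈ toPatternArray v := by
    rw [List.getD_eq_getElem?_getD, List.getElem?_eq_getElem (by omega : k < (toPatternArray v).length),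
      Option.getD_some]
    exact List.getElem_mem _
  exact hparts _ hmem

theorem pv_chunkF3_spec (rules : List (String × String)) (C : List Char) (hC : '/' ∉ C)
    (hOK : pvRulesOK (PySem.Dict.ofList rules) C = true)
    (hCF : pvConflictFree (PySem.Dict.ofList rules) = true)
    (h3 : pvComplete3 (PySem.Dict.ofList rules) C = true)
    (g : List String)
    (hgrid : ∀ row ∈ g, row.toList.length = g.length ∧ ∀ c ∈ row.toList, c ∈ C)
    (B' : Nat) (hB : 0 < B') (hn : g.length = 3*B') :
    ∀ j, j < B'*B' → ∀ k, k < 4 →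
      (pvChunkF3 (pvBuildTable rules) g B' j k).toList.length = 4 ∧
      ∀ c ∈ (pvChunkF3 (pvBuildTable rules) g B' j k).toList, c ∈ C := by
  intro j hj k hk
  obtain ⟨v, hval, -, htab⟩ := pv_resolve3 rules C hC hOK hCF h3 g hgrid B' hB hn j hj
  obtain ⟨-, hplen, hparts⟩ := pv_valOK_parts C 4 v (by omega) hval
  unfold pvChunkF3
  rw [htab, Option.getD_some]
  have hmem : (toPatternArray v).getD k "" ∈ toPatternArray v := by
    rw [List.getD_eq_getElem?_getD, List.getElem?_eq_getElem (by omega : k < (toPatternArray v).length),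
      Option.getD_some]
    exact List.getElem_mem _
  exact hparts _ hmem


theorem pv_stepA_even (rules : List (String × String)) (C : List Char) (hC : '/' ∉ C)
    (hOK : pvRulesOK (PySem.Dict.ofList rules) C = true)
    (hCF : pvConflictFree (PySem.Dict.ofList rules) = true)
    (h2 : pvComplete2 (PySem.Dict.ofList rules) C = true)
    (g : List String) (B' : Nat)
    (hgrid : ∀ row ∈ g, row.toList.length = g.length ∧ ∀ c ∈ row.toList, c ∈ C)
    (hB : 0 < B') (hn : g.length = 2*B') :
    part1Step (PySem.Dict.ofList rules) g = pvAsm B' 3 (pvChunkF2 (pvBuildTable rules) g B') := by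
  unfold part1Step pvAsm
  have hmod2 : ∀ a : Int, PySem.Int.mod a 2 = a % 2 := fun a => PySem.Int.mod_eq_emod_of_pos (by norm_num)
  have hdiv2 : ∀ a : Int, PySem.Int.floordiv a 2 = a / 2 := fun a => PySem.Int.floordiv_eq_ediv_of_pos (by norm_num)
  have e0 : ((2*B' : Nat) : Int) % 2 = 0 := by omega
  have e1 : ((2*B' : Nat) : Int) / 2 = ((B' : Nat) : Int) := by omega
  have e2 : ((B' : Nat) : Int)^2 = ((B'*B' : Nat) : Int) := by push_cast; ring
  have e3 : (((B' : Nat) : Int) * 3).toNat = 3*B' := by omega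
  simp only [hn, hmod2, hdiv2, e0, e1, e2, e3, beq_self_eq_true, if_true,
    PySem.List.pyRange_zero_natCast, List.foldl_map]
  apply PySem.List.foldl_congr_mem
  intro acc jn hjn
  rw [List.mem_range] at hjn
  obtain ⟨v, hval, happ, htab⟩ := pv_resolve2 rules C hC hOK hCF h2 g hgrid B' hB hn jn hjn
  have f1 : PySem.Int.floordiv (jn : Int) ((B' : Nat) : Int) = ((jn / B' : Nat) : Int) :=
    PySem.Int.floordiv_natCast jn B'
  have f2 : PySem.Int.mod (2 * (jn : Int)) ((2*B' : Nat) : Int) = ((2*(jn % B') : Nat) : Int) := by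
    rw [show (2 * (jn : Int)) = ((2*jn : Nat) : Int) from by push_cast; ring,
      PySem.Int.mod_natCast, Nat.mul_mod_mul_left]
  have eslice : ∀ (s : String) (c : Nat),
      PySem.Str.slice s (some ((c : Nat) : Int)) (some (((c : Nat) : Int) + 2))
        = String.ofList ((s.toList.drop c).take 2) := by
    intro s c
    have h2' : (PySem.Str.slice s (some (c : Int)) (some ((c : Int) + ((2:Nat) : Int)))).toList
        = (s.toList.drop c).take 2 := by
      rw [PySem.Str.toList_slice, PySem.Chars.slice_eq_listSlice, PySem.List.slice_natCast_add]
    rw [show ((2:Int)) = ((2:Nat) : Int) from by norm_num,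
      ← String.ofList_toList (s := PySem.Str.slice s _ _), h2']
  have erow0 : (2 : Int) * ((jn / B' : Nat) : Int) = ((2*(jn/B') : Nat) : Int) := by push_cast; ring
  have erow1 : ((2*(jn/B') : Nat) : Int) + 1 = ((2*(jn/B')+1 : Nat) : Int) := by push_cast; ring
  have eb : (3 : Int) * ((jn / B' : Nat) : Int) = ((3*(jn/B') : Nat) : Int) := by push_cast; ring
  have eb0 : ((3*(jn/B') : Nat) : Int) + 0 = ((3*(jn/B')+0 : Nat) : Int) := by push_cast; ring
  have eb1 : ((3*(jn/B') : Nat) : Int) + 1 = ((3*(jn/B')+1 : Nat) : Int) := by push_cast; ring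
  have eb2 : ((3*(jn/B') : Nat) : Int) + 2 = ((3*(jn/B')+2 : Nat) : Int) := by push_cast; ring
  simp only [f1, f2, erow0, erow1, eslice, PySem.List.pyGetD_natCast, happ, Option.getD_some,
    eb, eb0, eb1, eb2, PySem.List.pySetD_natCast, PySem.List.pyGetD_ofNat',
    List.range_succ, List.range_zero, List.foldl_nil, List.foldl_append, List.foldl_cons]
  unfold pvChunkF2
  rw [htab]
  simp only [Option.getD_some, Nat.add_zero]

theorem pv_stepA_odd (rules : List (String × String)) (C : List Char) (hC : '/' ∉ C)
    (hOK : pvRulesOK (PySem.Dict.ofList rules) C = true)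
    (hCF : pvConflictFree (PySem.Dict.ofList rules) = true)
    (h3 : pvComplete3 (PySem.Dict.ofList rules) C = true)
    (g : List String) (B' : Nat)
    (hgrid : ∀ row ∈ g, row.toList.length = g.length ∧ ∀ c ∈ row.toList, c ∈ C)
    (hB : 0 < B') (hn : g.length = 3*B') (hodd : g.length % 2 = 1) :
    part1Step (PySem.Dict.ofList rules) g = pvAsm B' 4 (pvChunkF3 (pvBuildTable rules) g B') := by
  unfold part1Step pvAsm
  have hmod2 : ∀ a : Int, PySem.Int.mod a 2 = a % 2 := fun a => PySem.Int.mod_eq_emod_of_pos (by norm_num)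
  have hdiv3 : ∀ a : Int, PySem.Int.floordiv a 3 = a / 3 := fun a => PySem.Int.floordiv_eq_ediv_of_pos (by norm_num)
  have e0 : ((3*B' : Nat) : Int) % 2 = 1 := by rw [← hn]; omega
  have e1 : ((3*B' : Nat) : Int) / 3 = ((B' : Nat) : Int) := by omega
  have e2 : ((B' : Nat) : Int)^2 = ((B'*B' : Nat) : Int) := by push_cast; ring
  have e3 : (((B' : Nat) : Int) * 4).toNat = 4*B' := by omega
  rw [hn] at hodd
  simp only [hn, hmod2, hdiv3, e0, e1, e2, e3,
    show ((1 : Int) == 0) = false from rfl, Bool.false_eq_true, if_false,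
    PySem.List.pyRange_zero_natCast, List.foldl_map]
  apply PySem.List.foldl_congr_mem
  intro acc jn hjn
  rw [List.mem_range] at hjn
  obtain ⟨v, hval, happ, htab⟩ := pv_resolve3 rules C hC hOK hCF h3 g hgrid B' hB hn jn hjn
  have f1 : PySem.Int.floordiv (jn : Int) ((B' : Nat) : Int) = ((jn / B' : Nat) : Int) :=
    PySem.Int.floordiv_natCast jn B'
  have f2 : PySem.Int.mod (3 * (jn : Int)) ((3*B' : Nat) : Int) = ((3*(jn % B') : Nat) : Int) := by
    rw [show (3 * (jn : Int)) = ((3*jn : Nat) : Int) from by push_cast; ring,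
      PySem.Int.mod_natCast, Nat.mul_mod_mul_left]
  have eslice : ∀ (s : String) (c : Nat),
      PySem.Str.slice s (some ((c : Nat) : Int)) (some (((c : Nat) : Int) + 3))
        = String.ofList ((s.toList.drop c).take 3) := by
    intro s c
    have h2' : (PySem.Str.slice s (some (c : Int)) (some ((c : Int) + ((3:Nat) : Int)))).toList
        = (s.toList.drop c).take 3 := by
      rw [PySem.Str.toList_slice, PySem.Chars.slice_eq_listSlice, PySem.List.slice_natCast_add]
    rw [show ((3:Int)) = ((3:Nat) : Int) from by norm_num,
      ← String.ofList_toList (s := PySem.Str.slice s _ _), h2']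
  have erow0 : (3 : Int) * ((jn / B' : Nat) : Int) = ((3*(jn/B') : Nat) : Int) := by push_cast; ring
  have erow1 : ((3*(jn/B') : Nat) : Int) + 1 = ((3*(jn/B')+1 : Nat) : Int) := by push_cast; ring
  have erow2 : ((3*(jn/B') : Nat) : Int) + 2 = ((3*(jn/B')+2 : Nat) : Int) := by push_cast; ring
  have eb : (4 : Int) * ((jn / B' : Nat) : Int) = ((4*(jn/B') : Nat) : Int) := by push_cast; ring
  have eb0 : ((4*(jn/B') : Nat) : Int) + 0 = ((4*(jn/B')+0 : Nat) : Int) := by push_cast; ring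
  have eb1 : ((4*(jn/B') : Nat) : Int) + 1 = ((4*(jn/B')+1 : Nat) : Int) := by push_cast; ring
  have eb2 : ((4*(jn/B') : Nat) : Int) + 2 = ((4*(jn/B')+2 : Nat) : Int) := by push_cast; ring
  have eb3 : ((4*(jn/B') : Nat) : Int) + 3 = ((4*(jn/B')+3 : Nat) : Int) := by push_cast; ring
  simp only [f1, f2, erow0, erow1, erow2, eslice, PySem.List.pyGetD_natCast, happ, Option.getD_some,
    eb, eb0, eb1, eb2, eb3, PySem.List.pySetD_natCast, PySem.List.pyGetD_ofNat',
    List.range_succ, List.range_zero, List.foldl_nil, List.foldl_append, List.foldl_cons]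
  unfold pvChunkF3
  rw [htab]
  simp only [Option.getD_some, Nat.add_zero]

theorem pv_stepB_even (rules : List (String × String)) (C : List Char) (hC : '/' ∉ C)
    (hOK : pvRulesOK (PySem.Dict.ofList rules) C = true)
    (hCF : pvConflictFree (PySem.Dict.ofList rules) = true)
    (h2 : pvComplete2 (PySem.Dict.ofList rules) C = true)
    (g : List String) (B' : Nat)
    (hgrid : ∀ row ∈ g, row.toList.length = g.length ∧ ∀ c ∈ row.toList, c ∈ C)
    (hB : 0 < B') (hn : g.length = 2*B') :
    part1AltStep (pvBuildTable rules) g = pvAsm B' 3 (pvChunkF2 (pvBuildTable rules) g B') := by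
  unfold part1AltStep pvAsm
  have hmod2 : ∀ a : Int, PySem.Int.mod a 2 = a % 2 := fun a => PySem.Int.mod_eq_emod_of_pos (by norm_num)
  have hdiv2 : ∀ a : Int, PySem.Int.floordiv a 2 = a / 2 := fun a => PySem.Int.floordiv_eq_ediv_of_pos (by norm_num)
  have e0 : ((2*B' : Nat) : Int) % 2 = 0 := by omega
  have e1 : ((2*B' : Nat) : Int) / 2 = ((B' : Nat) : Int) := by omega
  have e2 : ((B' : Nat) : Int) * ((B' : Nat) : Int) = ((B'*B' : Nat) : Int) := by push_cast; ring
  have e3 : (((B' : Nat) : Int) * (2+1)).toNat = 3*B' := by omega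
  simp only [hn, hmod2, hdiv2, e0, e1, e2, e3, beq_self_eq_true, if_true,
    PySem.List.pyRange_zero_natCast, List.foldl_map]
  apply PySem.List.foldl_congr_mem
  intro acc jn hjn
  rw [List.mem_range] at hjn
  obtain ⟨v, hval, happ, htab⟩ := pv_resolve2 rules C hC hOK hCF h2 g hgrid B' hB hn jn hjn
  have f1 : PySem.Int.floordiv (jn : Int) ((B' : Nat) : Int) = ((jn / B' : Nat) : Int) :=
    PySem.Int.floordiv_natCast jn B'
  have f2 : PySem.Int.mod (2 * (jn : Int)) ((2*B' : Nat) : Int) = ((2*(jn % B') : Nat) : Int) := by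
    rw [show (2 * (jn : Int)) = ((2*jn : Nat) : Int) from by push_cast; ring,
      PySem.Int.mod_natCast, Nat.mul_mod_mul_left]
  have eslice : ∀ (s : String) (c : Nat),
      PySem.Str.slice s (some ((c : Nat) : Int)) (some (((c : Nat) : Int) + 2))
        = String.ofList ((s.toList.drop c).take 2) := by
    intro s c
    have h2' : (PySem.Str.slice s (some (c : Int)) (some ((c : Int) + ((2:Nat) : Int)))).toList
        = (s.toList.drop c).take 2 := by
      rw [PySem.Str.toList_slice, PySem.Chars.slice_eq_listSlice, PySem.List.slice_natCast_add]
    rw [show ((2:Int)) = ((2:Nat) : Int) from by norm_num,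
      ← String.ofList_toList (s := PySem.Str.slice s _ _), h2']
  have hr2 : PySem.List.pyRange 0 2 1 = [0, 1] := by decide
  have hr3 : PySem.List.pyRange 0 (2+1) 1 = [0, 1, 2] := by decide
  have erow0 : ((jn / B' : Nat) : Int) * 2 + 0 = ((2*(jn/B') : Nat) : Int) := by push_cast; ring
  have erow1 : ((jn / B' : Nat) : Int) * 2 + 1 = ((2*(jn/B')+1 : Nat) : Int) := by push_cast; ring
  have eb0 : (2+1 : Int) * ((jn / B' : Nat) : Int) + 0 = ((3*(jn/B')+0 : Nat) : Int) := by push_cast; ring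
  have eb1 : (2+1 : Int) * ((jn / B' : Nat) : Int) + 1 = ((3*(jn/B')+1 : Nat) : Int) := by push_cast; ring
  have eb2 : (2+1 : Int) * ((jn / B' : Nat) : Int) + 2 = ((3*(jn/B')+2 : Nat) : Int) := by push_cast; ring
  simp only [f1, f2, hr2, hr3, List.map_cons, List.map_nil, erow0, erow1,
    eslice, PySem.List.pyGetD_natCast,
    show PySem.Str.join "/" = toPatternString from rfl, htab, Option.getD_some,
    eb0, eb1, eb2, PySem.List.pySetD_natCast, PySem.List.pyGetD_ofNat',
    List.range_succ, List.range_zero, List.foldl_nil, List.foldl_append, List.foldl_cons]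
  unfold pvChunkF2
  rw [htab]
  simp only [Option.getD_some, Nat.add_zero, toPatternArray]

theorem pv_stepB_odd (rules : List (String × String)) (C : List Char) (hC : '/' ∉ C)
    (hOK : pvRulesOK (PySem.Dict.ofList rules) C = true)
    (hCF : pvConflictFree (PySem.Dict.ofList rules) = true)
    (h3 : pvComplete3 (PySem.Dict.ofList rules) C = true)
    (g : List String) (B' : Nat)
    (hgrid : ∀ row ∈ g, row.toList.length = g.length ∧ ∀ c ∈ row.toList, c ∈ C)
    (hB : 0 < B') (hn : g.length = 3*B') (hodd : g.length % 2 = 1) :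
    part1AltStep (pvBuildTable rules) g = pvAsm B' 4 (pvChunkF3 (pvBuildTable rules) g B') := by
  unfold part1AltStep pvAsm
  have hmod2 : ∀ a : Int, PySem.Int.mod a 2 = a % 2 := fun a => PySem.Int.mod_eq_emod_of_pos (by norm_num)
  have hdiv3 : ∀ a : Int, PySem.Int.floordiv a 3 = a / 3 := fun a => PySem.Int.floordiv_eq_ediv_of_pos (by norm_num)
  have e0 : ((3*B' : Nat) : Int) % 2 = 1 := by rw [← hn]; omega
  have e1 : ((3*B' : Nat) : Int) / 3 = ((B' : Nat) : Int) := by omega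
  have e2 : ((B' : Nat) : Int) * ((B' : Nat) : Int) = ((B'*B' : Nat) : Int) := by push_cast; ring
  have e3 : (((B' : Nat) : Int) * (3+1)).toNat = 4*B' := by omega
  rw [hn] at hodd
  simp only [hn, hmod2, hdiv3, e0, e1, e2, e3,
    show ((1 : Int) == 0) = false from rfl, Bool.false_eq_true, if_false,
    PySem.List.pyRange_zero_natCast, List.foldl_map]
  apply PySem.List.foldl_congr_mem
  intro acc jn hjn
  rw [List.mem_range] at hjn
  obtain ⟨v, hval, happ, htab⟩ := pv_resolve3 rules C hC hOK hCF h3 g hgrid B' hB hn jn hjn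
  have f1 : PySem.Int.floordiv (jn : Int) ((B' : Nat) : Int) = ((jn / B' : Nat) : Int) :=
    PySem.Int.floordiv_natCast jn B'
  have f2 : PySem.Int.mod (3 * (jn : Int)) ((3*B' : Nat) : Int) = ((3*(jn % B') : Nat) : Int) := by
    rw [show (3 * (jn : Int)) = ((3*jn : Nat) : Int) from by push_cast; ring,
      PySem.Int.mod_natCast, Nat.mul_mod_mul_left]
  have eslice : ∀ (s : String) (c : Nat),
      PySem.Str.slice s (some ((c : Nat) : Int)) (some (((c : Nat) : Int) + 3))
        = String.ofList ((s.toList.drop c).take 3) := by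
    intro s c
    have h2' : (PySem.Str.slice s (some (c : Int)) (some ((c : Int) + ((3:Nat) : Int)))).toList
        = (s.toList.drop c).take 3 := by
      rw [PySem.Str.toList_slice, PySem.Chars.slice_eq_listSlice, PySem.List.slice_natCast_add]
    rw [show ((3:Int)) = ((3:Nat) : Int) from by norm_num,
      ← String.ofList_toList (s := PySem.Str.slice s _ _), h2']
  have hr3 : PySem.List.pyRange 0 3 1 = [0, 1, 2] := by decide
  have hr4 : PySem.List.pyRange 0 (3+1) 1 = [0, 1, 2, 3] := by decide
  have erow0 : ((jn / B' : Nat) : Int) * 3 + 0 = ((3*(jn/B') : Nat) : Int) := by push_cast; ring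
  have erow1 : ((jn / B' : Nat) : Int) * 3 + 1 = ((3*(jn/B')+1 : Nat) : Int) := by push_cast; ring
  have erow2 : ((jn / B' : Nat) : Int) * 3 + 2 = ((3*(jn/B')+2 : Nat) : Int) := by push_cast; ring
  have eb0 : (3+1 : Int) * ((jn / B' : Nat) : Int) + 0 = ((4*(jn/B')+0 : Nat) : Int) := by push_cast; ring
  have eb1 : (3+1 : Int) * ((jn / B' : Nat) : Int) + 1 = ((4*(jn/B')+1 : Nat) : Int) := by push_cast; ring
  have eb2 : (3+1 : Int) * ((jn / B' : Nat) : Int) + 2 = ((4*(jn/B')+2 : Nat) : Int) := by push_cast; ring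
  have eb3 : (3+1 : Int) * ((jn / B' : Nat) : Int) + 3 = ((4*(jn/B')+3 : Nat) : Int) := by push_cast; ring
  simp only [f1, f2, hr3, hr4, List.map_cons, List.map_nil, erow0, erow1, erow2,
    eslice, PySem.List.pyGetD_natCast,
    show PySem.Str.join "/" = toPatternString from rfl, htab, Option.getD_some,
    eb0, eb1, eb2, eb3, PySem.List.pySetD_natCast, PySem.List.pyGetD_ofNat',
    List.range_succ, List.range_zero, List.foldl_nil, List.foldl_append, List.foldl_cons]
  unfold pvChunkF3
  rw [htab]
  simp only [Option.getD_some, Nat.add_zero, toPatternArray]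

-- grids of size 0 or 1 collapse to [] in both ports
theorem pv_stepA_triv (d : PySem.Dict String String) (g : List String) (hg : g.length ≤ 1) :
    part1Step d g = [] := by
  unfold part1Step
  have hmod2 : ∀ a : Int, PySem.Int.mod a 2 = a % 2 := fun a => PySem.Int.mod_eq_emod_of_pos (by norm_num)
  have hdiv2 : ∀ a : Int, PySem.Int.floordiv a 2 = a / 2 := fun a => PySem.Int.floordiv_eq_ediv_of_pos (by norm_num)
  have hdiv3 : ∀ a : Int, PySem.Int.floordiv a 3 = a / 3 := fun a => PySem.Int.floordiv_eq_ediv_of_pos (by norm_num)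
  interval_cases h : g.length
  · simp only [Nat.cast_zero, hmod2, hdiv2, hdiv3]
    norm_num
  · simp only [Nat.cast_one, hmod2, hdiv2, hdiv3]
    norm_num

theorem pv_stepB_triv (table : PySem.Dict String String) (g : List String) (hg : g.length ≤ 1) :
    part1AltStep table g = [] := by
  unfold part1AltStep
  have hmod2 : ∀ a : Int, PySem.Int.mod a 2 = a % 2 := fun a => PySem.Int.mod_eq_emod_of_pos (by norm_num)
  have hdiv2 : ∀ a : Int, PySem.Int.floordiv a 2 = a / 2 := fun a => PySem.Int.floordiv_eq_ediv_of_pos (by norm_num)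
  interval_cases h : g.length
  · simp only [Nat.cast_zero, hmod2]
    norm_num
  · simp only [Nat.cast_one, hmod2]
    norm_num

-- the grid invariant carried through the iterations
def pvInv (C : List Char) (g : List String) : Prop :=
  g.length ≤ 1 ∨
    ((∀ r ∈ g, r.toList.length = g.length ∧ ∀ c ∈ r.toList, c ∈ C) ∧
     (g.length % 2 = 0 ∨ g.length % 3 = 0))

theorem pvStep_agree (rules : List (String × String)) (C : List Char) (hC : '/' ∉ C)
    (hOK : pvRulesOK (PySem.Dict.ofList rules) C = true)
    (hCF : pvConflictFree (PySem.Dict.ofList rules) = true)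
    (h2 : pvComplete2 (PySem.Dict.ofList rules) C = true)
    (h3 : pvComplete3 (PySem.Dict.ofList rules) C = true)
    (g : List String) (hg : pvInv C g) :
    part1Step (PySem.Dict.ofList rules) g = part1AltStep (pvBuildTable rules) g ∧
      pvInv C (part1Step (PySem.Dict.ofList rules) g) := by
  by_cases hlen : g.length ≤ 1
  · rw [pv_stepA_triv _ g hlen, pv_stepB_triv _ g hlen]
    exact ⟨rfl, Or.inl (by simp)⟩
  · rcases hg with h | ⟨hrows, hdiv⟩
    · exact absurd h hlen
    · rw [Nat.not_le] at hlen
      by_cases he : g.length % 2 = 0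
      · have hB : 0 < g.length / 2 := by omega
        have hn : g.length = 2*(g.length / 2) := by omega
        have hA := pv_stepA_even rules C hC hOK hCF h2 g (g.length / 2) hrows hB hn
        have hBs := pv_stepB_even rules C hC hOK hCF h2 g (g.length / 2) hrows hB hn
        obtain ⟨hLen, hRows⟩ := pvAsm_spec (g.length / 2) 3 C (pvChunkF2 (pvBuildTable rules) g (g.length / 2))
          (by norm_num) (pv_chunkF2_spec rules C hC hOK hCF h2 g hrows (g.length / 2) hB hn)
        refine ⟨by rw [hA, hBs], Or.inr ⟨?_, ?_⟩⟩
        · rw [hA]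
          intro row hrow
          rw [hLen]
          exact hRows row hrow
        · rw [hA, hLen]
          exact Or.inr (by omega)
      · have ho3 : g.length % 3 = 0 := by
          rcases hdiv with h | h
          · exact absurd h he
          · exact h
        have hodd : g.length % 2 = 1 := by omega
        have hB : 0 < g.length / 3 := by omega
        have hn : g.length = 3*(g.length / 3) := by omega
        have hA := pv_stepA_odd rules C hC hOK hCF h3 g (g.length / 3) hrows hB hn hodd
        have hBs := pv_stepB_odd rules C hC hOK hCF h3 g (g.length / 3) hrows hB hn hodd
        obtain ⟨hLen, hRows⟩ := pvAsm_spec (g.length / 3) 4 C (pvChunkF3 (pvBuildTable rules) g (g.length / 3))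
          (by norm_num) (pv_chunkF3_spec rules C hC hOK hCF h3 g hrows (g.length / 3) hB hn)
        refine ⟨by rw [hA, hBs], Or.inr ⟨?_, ?_⟩⟩
        · rw [hA]
          intro row hrow
          rw [hLen]
          exact hRows row hrow
        · rw [hA, hLen]
          exact Or.inl (by omega)

-- ===== VERDICT (by name: the statement is the Claim_ definition above) =====
-- a degenerate grid stays degenerate: both ports map it to [] forever
theorem pv_fold_triv (rules : List (String × String)) (l : List Int) :
    ∀ g : List String, g.length ≤ 1 →
      l.foldl (fun g _ => part1Step (PySem.Dict.ofList rules) g) g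
        = l.foldl (fun g _ => part1AltStep (pvBuildTable rules) g) g := by
  induction l with
  | nil => intro g _; rfl
  | cons a l ih =>
    intro g hg
    simp only [List.foldl_cons]
    rw [pv_stepA_triv _ g hg, pv_stepB_triv _ g hg]
    exact ih [] (by simp)

theorem pv_fold_main (rules : List (String × String)) (C : List Char) (hC : '/' ∉ C)
    (hOK : pvRulesOK (PySem.Dict.ofList rules) C = true)
    (hCF : pvConflictFree (PySem.Dict.ofList rules) = true)
    (h2 : pvComplete2 (PySem.Dict.ofList rules) C = true)
    (h3 : pvComplete3 (PySem.Dict.ofList rules) C = true)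
    (l : List Int) :
    ∀ g : List String, pvInv C g →
      l.foldl (fun g _ => part1Step (PySem.Dict.ofList rules) g) g
        = l.foldl (fun g _ => part1AltStep (pvBuildTable rules) g) g := by
  induction l with
  | nil => intro g _; rfl
  | cons a l ih =>
    intro g hg
    obtain ⟨heq, hinv⟩ := pvStep_agree rules C hC hOK hCF h2 h3 g hg
    simp only [List.foldl_cons]
    rw [← heq]
    exact ih _ hinv

theorem part1_spec : Claim_equal_part1 := by
  unfold Claim_equal_part1
  intro shape rules n hdom hpre
  unfold Spec_part1 part1 part1_alt
  by_cases hn : n ≤ 0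
  · rw [show PySem.List.pyRange 0 n 1 = [] from by simp [PySem.List.pyRange]; omega]
    rfl
  · rcases hpre with h | h | ⟨hsq, hns, hdiv, hOK, hCF, h2, h3⟩
    · exact absurd h hn
    · exact pv_fold_triv rules _ shape h
    · have hC : '/' ∉ pvAlphabet shape rules := by
        intro hmem
        unfold pvAlphabet at hmem
        rw [PySem.List.mem_dedup] at hmem
        rcases List.mem_append.mp hmem with h | h
        · obtain ⟨row, hrow, hc⟩ := List.mem_flatMap.mp h
          simp only [pvNoSlash, List.all_eq_true] at hns
          have := hns row hrow
          simp only [Bool.not_eq_eq_eq_not, Bool.not_true, List.contains_eq_mem,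
            decide_eq_false_iff_not] at this
          exact this hc
        · obtain ⟨p, hp, hc⟩ := List.mem_flatMap.mp h
          have := List.of_mem_filter hc
          simp at this
      have hinv : pvInv (pvAlphabet shape rules) shape := by
        right
        refine ⟨?_, hdiv⟩
        intro row hrow
        constructor
        · simp only [pvSquare, List.all_eq_true, beq_iff_eq] at hsq
          exact hsq row hrow
        · intro c hc
          unfold pvAlphabet
          rw [PySem.List.mem_dedup]
          exact List.mem_append_left _ (List.mem_flatMap.mpr ⟨row, hrow, hc⟩)
      exact pv_fold_main rules _ hC hOK hCF h2 h3 _ shape hinv
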